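-- pv_equiv track=rewrite | github.com/eunhee-dev/problem-solving | 0x0d. simulation/23288번. 주사위 굴리기 2/solve.py | get_score_board_bfs
-- ===== SOURCE A (Python) =====
-- from collections import deque
--
-- DIRECTIONS = [(0, 1), (1, 0), (0, -1), (-1, 0)]
--
-- def get_score_board_bfs(board: list[list[int]]) -> list[list[int]]:
--     n, m = len(board), len(board[0])
--     score_board = [[0] * m for _ in range(n)]
--
--     for sx in range(n):
--         for sy in range(m):
--             if score_board[sx][sy] != 0:
--                 continue
--
--             queue = deque([(sx, sy)])
--             visited = {(sx, sy)}
--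
--             while queue:
--                 x, y = queue.popleft()
--                 for dx, dy in DIRECTIONS:
--                     nx, ny = x + dx, y + dy
--                     if not (0 <= nx < n and 0 <= ny < m):
--                         continue
--                     if board[nx][ny] == board[x][y] and (nx, ny) not in visited:
--                         queue.append((nx, ny))
--                         visited.add((nx, ny))
--
--             for x, y in visited:
--                 score_board[x][y] = board[x][y] * len(visited)
--
--     return score_board
-- ===== SOURCE B (Python) =====
-- def get_score_board_bfs(board: list[list[int]]) -> list[list[int]]:
--     n, m = len(board), len(board[0])
--     total = n * m
--     parent = list(range(total))
--
--     def find(i: int) -> int: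
--         while parent[i] != i:
--             i = parent[i]
--         return i
--
--     def union(a: int, b: int) -> None:
--         ra, rb = find(a), find(b)
--         if ra == rb:
--             return
--         if ra < rb:
--             parent[rb] = ra
--         else:
--             parent[ra] = rb
--
--     # union-find over cells: one union per down/right same-valued neighbour pair
--     for x in range(n):
--         for y in range(m):
--             if x + 1 < n and board[x + 1][y] == board[x][y]:
--                 union(x * m + y, (x + 1) * m + y)
--             if y + 1 < m and board[x][y + 1] == board[x][y]:
--                 union(x * m + y, x * m + y + 1)
--
--     size = [0] * total
--     for i in range(total):
--         size[find(i)] += 1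
--
--     return [[board[x][y] * size[find(x * m + y)] for y in range(m)] for x in range(n)]
-- ===== Notes on version B (the rewrite author's own statement) =====
-- stated objective: alternative
-- what changed: B replaces A's per-cell restarted BFS flood fill by a union-find (disjoint-set) pass: one union per right/down equal-valued neighbour pair, component sizes by counting find-roots, then one comprehension writes value*size per cell; A's worst case is quadratic because zero-valued components are re-traversed from every one of their cells.
import Mathlib
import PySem

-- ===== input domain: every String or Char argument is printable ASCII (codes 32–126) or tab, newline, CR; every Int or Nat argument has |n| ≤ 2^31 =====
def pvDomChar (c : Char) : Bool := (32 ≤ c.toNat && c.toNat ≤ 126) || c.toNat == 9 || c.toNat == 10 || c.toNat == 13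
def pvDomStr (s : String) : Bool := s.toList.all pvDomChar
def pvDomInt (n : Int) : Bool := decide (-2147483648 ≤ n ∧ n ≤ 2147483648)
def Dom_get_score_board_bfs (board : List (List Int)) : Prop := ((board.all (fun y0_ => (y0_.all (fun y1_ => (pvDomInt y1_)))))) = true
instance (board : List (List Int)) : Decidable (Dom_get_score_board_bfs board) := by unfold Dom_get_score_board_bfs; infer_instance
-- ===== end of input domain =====

-- B replaces A's repeated BFS flood fill by a union-find (disjoint-set) pass: one union per
-- right/down equal-valued neighbour pair, then component sizes by counting roots; the return
-- value is proved identical on every board on which the Python A returns.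
-- ===== PORT A =====
-- state threaded through A's BFS loops: (worklist, visited set, ghost remaining list)
-- the third component is a TERMINATION GHOST: it always holds exactly the in-range cells not yet
-- in the visited set, so the test '(nx,ny) ∈ r' is implied by the Python's two previous tests
-- (in-range and not-in-visited); it is kept so the recursion measure (5*|r| + |worklist|) decreases.
def pvDIRECTIONS : List (Int × Int) := [(0, 1), (1, 0), (0, -1), (-1, 0)]

def pvAt (board : List (List Int)) (x y : Int) : Int :=
  PySem.List.pyGetD (PySem.List.pyGetD board x []) y 0

def pvSet2 (s : List (List Int)) (x y : Int) (v : Int) : List (List Int) :=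
  PySem.List.pySetD s x (PySem.List.pySetD (PySem.List.pyGetD s x []) y v)

def pvGridCells (n m : Int) : List (Int × Int) :=
  (PySem.List.pyRange 0 n 1).product (PySem.List.pyRange 0 m 1)

-- one step of the 'for dx, dy in DIRECTIONS' body of A's BFS
def pvStepA (board : List (List Int)) (n m : Int) (x y : Int)
    (s : List (Int × Int) × List (Int × Int) × List (Int × Int)) (d : Int × Int) :
    List (Int × Int) × List (Int × Int) × List (Int × Int) :=
  let nx := x + d.1
  let ny := y + d.2
  if 0 ≤ nx ∧ nx < n ∧ 0 ≤ ny ∧ ny < m then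
    if pvAt board nx ny = pvAt board x y ∧ (nx, ny) ∉ s.2.1 ∧ (nx, ny) ∈ s.2.2 then
      (s.1 ++ [(nx, ny)], PySem.Set.add s.2.1 (nx, ny), s.2.2.erase (nx, ny))
    else s
  else s

theorem pvStepA_measure (board : List (List Int)) (n m x y : Int)
    (ds : List (Int × Int)) :
    ∀ s : List (Int × Int) × List (Int × Int) × List (Int × Int),
      5 * (ds.foldl (pvStepA board n m x y) s).2.2.length +
        (ds.foldl (pvStepA board n m x y) s).1.length ≤
      5 * s.2.2.length + s.1.length := by
  induction ds with
  | nil => intro s; simp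
  | cons d ds ih =>
      intro s
      refine le_trans (ih _) ?_
      simp only [pvStepA]
      split_ifs with h1 h2
      · have hmem : (x + d.1, y + d.2) ∈ s.2.2 := h2.2.2
        have : s.2.2.length ≠ 0 := by
          intro h0; rw [List.length_eq_zero_iff] at h0; simp [h0] at hmem
        simp [List.length_erase_of_mem hmem]
        omega
      · exact le_rfl
      · exact le_rfl

-- A's 'while queue' loop
def pvBfs (board : List (List Int)) (n m : Int)
    (queue : List (Int × Int)) (visited : List (Int × Int)) (r : List (Int × Int)) :
    List (Int × Int) :=
  match queue with
  | [] => visited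
  | (x, y) :: qs =>
      let s := pvDIRECTIONS.foldl (pvStepA board n m x y) (qs, visited, r)
      pvBfs board n m s.1 s.2.1 s.2.2
termination_by 5 * r.length + queue.length
decreasing_by
  have := pvStepA_measure board n m x y pvDIRECTIONS (qs, visited, r)
  simp at this ⊢
  omega

def get_score_board_bfs (board : List (List Int)) : List (List Int) :=
  let n : Int := board.length
  let m : Int := (PySem.List.pyGetD board 0 []).length
  let init : List (List Int) := List.replicate n.toNat (List.replicate m.toNat 0)
  (PySem.List.pyRange 0 n 1).foldl (fun sb sx =>
    (PySem.List.pyRange 0 m 1).foldl (fun sb sy =>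
      if pvAt sb sx sy ≠ 0 then sb
      else
        let visited := pvBfs board n m [(sx, sy)] (PySem.Set.ofList [(sx, sy)])
          ((pvGridCells n m).erase (sx, sy))
        -- 'for x, y in visited': writes to pairwise-distinct cells, so the set order is immaterial
        visited.foldl (fun sb c =>
          pvSet2 sb c.1 c.2 (pvAt board c.1 c.2 * (visited.length : Int))) sb) sb) init

-- ===== PORT B =====
-- union-find over the n*m cells, row-major index x*m+y (indices are nonnegative, held as Nat)
-- 'while parent[i] != i: i = parent[i]' — ported with fuel |parent|, enough because union
-- always points the larger root at the smaller one, so parent chains strictly decrease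
def pvFindF (p : List Nat) : Nat → Nat → Nat
  | 0, i => i
  | f + 1, i => if p.getD i i = i then i else pvFindF p f (p.getD i i)

def pvFind (p : List Nat) (i : Nat) : Nat := pvFindF p p.length i

def pvUnion (p : List Nat) (a b : Nat) : List Nat :=
  let ra := pvFind p a
  let rb := pvFind p b
  if ra = rb then p
  else if ra < rb then p.set rb ra else p.set ra rb

def pvCellIdx (m x y : Int) : Nat := (x * m + y).toNat

-- the two union calls of B's double loop
def pvParent (board : List (List Int)) (n m : Int) : List Nat :=
  (PySem.List.pyRange 0 n 1).foldl (fun p x =>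
    (PySem.List.pyRange 0 m 1).foldl (fun p y =>
      let p1 := if x + 1 < n ∧ pvAt board (x + 1) y = pvAt board x y then
          pvUnion p (pvCellIdx m x y) (pvCellIdx m (x + 1) y) else p
      if y + 1 < m ∧ pvAt board x (y + 1) = pvAt board x y then
        pvUnion p1 (pvCellIdx m x y) (pvCellIdx m x (y + 1)) else p1) p)
    (List.range (n.toNat * m.toNat))

-- 'size[find(i)] += 1' over range(total)
def pvSizes (p : List Nat) (N : Nat) : List Nat :=
  (List.range N).foldl (fun s i => s.set (pvFind p i) (s.getD (pvFind p i) 0 + 1))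
    (List.replicate N 0)

def get_score_board_bfs_alt (board : List (List Int)) : List (List Int) :=
  let n : Int := board.length
  let m : Int := (PySem.List.pyGetD board 0 []).length
  let p := pvParent board n m
  let size := pvSizes p (n.toNat * m.toNat)
  (PySem.List.pyRange 0 n 1).map (fun x =>
    (PySem.List.pyRange 0 m 1).map (fun y =>
      pvAt board x y * (size.getD (pvFind p (pvCellIdx m x y)) 0 : Int)))

-- ===== PRECONDITION & SPEC =====
-- Pre_ is exactly where the Python A returns normally: a nonempty board whose every row has at
-- least len(board[0]) entries (a shorter row raises IndexError when its missing cell is read).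
def Pre_get_score_board_bfs (board : List (List Int)) : Prop :=
  board ≠ [] ∧ ∀ row ∈ board, (PySem.List.pyGetD board 0 []).length ≤ row.length
instance (board : List (List Int)) : Decidable (Pre_get_score_board_bfs board) := by
  unfold Pre_get_score_board_bfs; infer_instance
def pvWitness_get_score_board_bfs : List (List Int) := [[1, 1], [2, 1]]

def Spec_get_score_board_bfs (board : List (List Int)) (out : List (List Int)) : Prop := out = get_score_board_bfs_alt board
instance (board : List (List Int)) (out : List (List Int)) : Decidable (Spec_get_score_board_bfs board out) := by unfold Spec_get_score_board_bfs; infer_instance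

-- ===== CLAIM (what is proved, stated in full; the proofs are below) =====
def Claim_equal_get_score_board_bfs : Prop := ∀ (board : List (List Int)), Dom_get_score_board_bfs board → Pre_get_score_board_bfs board → Spec_get_score_board_bfs board (get_score_board_bfs board)

-- ===== LEMMAS AND PROOFS =====

-- ---------- an intermediate flood-fill program (proof ghost): A is first proved equal to it ----------
-- pvFlood does one DFS flood fill per component with a global done set; the old-style simulation
-- invariant pvRel below relates A's run to pvFlood's run, giving A's pointwise characterisation.
def pvStepB (board : List (List Int)) (n m : Int) (v : Int)
    (s : List (Int × Int) × List (Int × Int) × List (Int × Int)) (c : Int × Int) :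
    List (Int × Int) × List (Int × Int) × List (Int × Int) :=
  if 0 ≤ c.1 ∧ c.1 < n ∧ 0 ≤ c.2 ∧ c.2 < m ∧ c ∉ s.2.1 ∧ c ∈ s.2.2 ∧ pvAt board c.1 c.2 = v then
    (s.1 ++ [c], PySem.Set.add s.2.1 c, s.2.2.erase c)
  else s

theorem pvStepB_measure (board : List (List Int)) (n m v : Int)
    (cs : List (Int × Int)) :
    ∀ s : List (Int × Int) × List (Int × Int) × List (Int × Int),
      5 * (cs.foldl (pvStepB board n m v) s).2.2.length +
        (cs.foldl (pvStepB board n m v) s).1.length ≤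
      5 * s.2.2.length + s.1.length := by
  induction cs with
  | nil => intro s; simp
  | cons c cs ih =>
      intro s
      refine le_trans (ih _) ?_
      simp only [pvStepB]
      split_ifs with h1
      · have hmem : c ∈ s.2.2 := h1.2.2.2.2.2.1
        have : s.2.2.length ≠ 0 := by
          intro h0; rw [List.length_eq_zero_iff] at h0; simp [h0] at hmem
        simp [List.length_erase_of_mem hmem]
        omega
      · exact le_rfl

def pvDfs (board : List (List Int)) (n m : Int) (v : Int)
    (stack : List (Int × Int)) (done : List (Int × Int)) (comp : List (Int × Int))
    (r : List (Int × Int)) :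
    List (Int × Int) × List (Int × Int) × List (Int × Int) :=
  if h : stack = [] then (comp, done, r)
  else
    let xy := stack.getLast h
    let st := stack.dropLast
    let comp' := comp ++ [xy]
    let s := [(xy.1, xy.2 + 1), (xy.1 + 1, xy.2), (xy.1, xy.2 - 1), (xy.1 - 1, xy.2)].foldl
      (pvStepB board n m v) (st, done, r)
    pvDfs board n m v s.1 s.2.1 comp' s.2.2
termination_by 5 * r.length + stack.length
decreasing_by
  have := pvStepB_measure board n m v
    [(xy.1, xy.2 + 1), (xy.1 + 1, xy.2), (xy.1, xy.2 - 1), (xy.1 - 1, xy.2)] (st, done, r)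
  simp only [xy, st] at this
  have hst : st.length + 1 = stack.length := by
    simp [st, List.length_dropLast]
    have : stack.length ≠ 0 := by simpa [List.length_eq_zero_iff] using h
    omega
  simp at this ⊢
  omega

def pvFlood (board : List (List Int)) : List (List Int) :=
  let n : Int := board.length
  let m : Int := (PySem.List.pyGetD board 0 []).length
  let init : List (List Int) := List.replicate n.toNat (List.replicate m.toNat 0)
  ((PySem.List.pyRange 0 n 1).foldl
    (fun (st : List (List Int) × List (Int × Int) × List (Int × Int)) sx =>
    (PySem.List.pyRange 0 m 1).foldl
      (fun (st : List (List Int) × List (Int × Int) × List (Int × Int)) sy =>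
      if (sx, sy) ∈ st.2.1 then st
      else
        let v := pvAt board sx sy
        let res := pvDfs board n m v [(sx, sy)] (PySem.Set.add st.2.1 (sx, sy)) []
          (st.2.2.erase (sx, sy))
        let score := v * (res.1.length : Int)
        (res.1.foldl (fun sb (c : Int × Int) => pvSet2 sb c.1 c.2 score) st.1, res.2.1, res.2.2)) st)
    (init, (PySem.Set.empty : List (Int × Int)), pvGridCells n m)).1

-- ---------- basic notions: grid, adjacency, reachability, components ----------
def pvGrid (n m : Int) (c : Int × Int) : Prop :=
  0 ≤ c.1 ∧ c.1 < n ∧ 0 ≤ c.2 ∧ c.2 < m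

def pvAdj (board : List (List Int)) (n m : Int) (c c' : Int × Int) : Prop :=
  pvGrid n m c' ∧ (c'.1 - c.1, c'.2 - c.2) ∈ pvDIRECTIONS ∧
    pvAt board c'.1 c'.2 = pvAt board c.1 c.2

def pvReach (board : List (List Int)) (n m : Int) : Int × Int → Int × Int → Prop :=
  Relation.ReflTransGen (pvAdj board n m)

def pvCompList (board : List (List Int)) (n m : Int) (s : Int × Int)
    (L : List (Int × Int)) : Prop :=
  L.Nodup ∧ ∀ c, c ∈ L ↔ pvReach board n m s c

theorem pv_mem_gridCells (n m : Int) (c : Int × Int) :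
    c ∈ pvGridCells n m ↔ pvGrid n m c := by
  cases c with
  | mk a b =>
    simp [pvGridCells, PySem.List.mem_pyRange_one, pvGrid]
    tauto

theorem pv_nodup_gridCells (n m : Int) : (pvGridCells n m).Nodup :=
  List.Nodup.product (PySem.List.nodup_pyRange_one 0 n) (PySem.List.nodup_pyRange_one 0 m)

theorem pvAdj_symm (board : List (List Int)) (n m : Int) {c c' : Int × Int}
    (hc : pvGrid n m c) (h : pvAdj board n m c c') : pvAdj board n m c' c := by
  obtain ⟨hg, hd, hv⟩ := h
  refine ⟨hc, ?_, hv.symm⟩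
  simp [pvDIRECTIONS] at hd ⊢
  omega

theorem pvReach_grid (board : List (List Int)) (n m : Int) {s c : Int × Int}
    (hs : pvGrid n m s) (h : pvReach board n m s c) : pvGrid n m c := by
  induction h with
  | refl => exact hs
  | tail _ hadj ih => exact hadj.1

theorem pvReach_symm (board : List (List Int)) (n m : Int) {s c : Int × Int}
    (hs : pvGrid n m s) (h : pvReach board n m s c) : pvReach board n m c s := by
  induction h with
  | refl => exact Relation.ReflTransGen.refl
  | tail hr hadj ih =>
      exact Relation.ReflTransGen.head
        (pvAdj_symm board n m (pvReach_grid board n m hs hr) hadj) ih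

theorem pvReach_val (board : List (List Int)) (n m : Int) {s c : Int × Int}
    (h : pvReach board n m s c) : pvAt board c.1 c.2 = pvAt board s.1 s.2 := by
  induction h with
  | refl => rfl
  | tail _ hadj ih => exact hadj.2.2.trans ih

theorem pvCompList_congr (board : List (List Int)) (n m : Int) {s c : Int × Int}
    {L : List (Int × Int)} (hs : pvGrid n m s) (hr : pvReach board n m s c)
    (hL : pvCompList board n m s L) : pvCompList board n m c L := by
  refine ⟨hL.1, fun x => ?_⟩
  rw [hL.2]
  constructor
  · intro h; exact Relation.ReflTransGen.trans (pvReach_symm board n m hs hr) h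
  · intro h; exact Relation.ReflTransGen.trans hr h

theorem pvCompList_length (board : List (List Int)) (n m : Int) {s : Int × Int}
    {L L' : List (Int × Int)} (h : pvCompList board n m s L)
    (h' : pvCompList board n m s L') : L.length = L'.length := by
  refine List.Perm.length_eq ?_
  rw [List.perm_ext_iff_of_nodup h.1 h'.1]
  intro a; rw [h.2, h'.2]

-- ---------- the worklist invariant and the shared fold lemma ----------
def pvInvM (n m : Int) (q v r : List (Int × Int)) : Prop :=
  v.Nodup ∧ (∀ c ∈ q, c ∈ v) ∧ (∀ c ∈ v, pvGrid n m c) ∧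
  r.Nodup ∧ (∀ c, pvGrid n m c → (c ∈ r ↔ c ∉ v)) ∧ (∀ c ∈ r, pvGrid n m c)

theorem pvStepA_eq_stepB (board : List (List Int)) (n m x y : Int)
    (s : List (Int × Int) × List (Int × Int) × List (Int × Int)) (d : Int × Int) :
    pvStepA board n m x y s d =
      pvStepB board n m (pvAt board x y) s (x + d.1, y + d.2) := by
  simp only [pvStepA, pvStepB]
  split_ifs with h1 h2 h3 h3 <;> first | rfl | (exfalso; tauto)

theorem pvFold_spec (board : List (List Int)) (n m vv : Int) (x y : Int)
    (hxy : pvAt board x y = vv) :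
    ∀ (cs : List (Int × Int)), (∀ c ∈ cs, (c.1 - x, c.2 - y) ∈ pvDIRECTIONS) →
    ∀ q don r, pvInvM n m q don r →
    (∃ new, (cs.foldl (pvStepB board n m vv) (q, don, r)).1 = q ++ new ∧
        (cs.foldl (pvStepB board n m vv) (q, don, r)).2.1 = don ++ new ∧
        (∀ c ∈ new, pvAdj board n m (x, y) c)) ∧
    pvInvM n m (cs.foldl (pvStepB board n m vv) (q, don, r)).1
      (cs.foldl (pvStepB board n m vv) (q, don, r)).2.1
      (cs.foldl (pvStepB board n m vv) (q, don, r)).2.2 ∧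
    (∀ c ∈ cs, pvAdj board n m (x, y) c →
      c ∈ (cs.foldl (pvStepB board n m vv) (q, don, r)).2.1) := by
  intro cs
  induction cs with
  | nil =>
      intro _ q don r hInv
      exact ⟨⟨[], by simp, by simp, by simp⟩, by simpa using hInv, by simp⟩
  | cons c cs ih =>
      intro hcs q don r hInv
      obtain ⟨h1, h2, h3, h4, h5, h6⟩ := hInv
      simp only [List.foldl_cons]
      by_cases hcond : 0 ≤ c.1 ∧ c.1 < n ∧ 0 ≤ c.2 ∧ c.2 < m ∧ c ∉ don ∧ c ∈ r ∧
          pvAt board c.1 c.2 = vv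
      · have hgc : pvGrid n m c := ⟨hcond.1, hcond.2.1, hcond.2.2.1, hcond.2.2.2.1⟩
        have hnotm : c ∉ don := hcond.2.2.2.2.1
        have hadd : PySem.Set.add don c = don ++ [c] := by
          simp [PySem.Set.add, PySem.Set.contains, hnotm]
        have hstep : pvStepB board n m vv (q, don, r) c = (q ++ [c], don ++ [c], r.erase c) := by
          simp only [pvStepB]
          rw [if_pos hcond, hadd]
        rw [hstep]
        have hInv' : pvInvM n m (q ++ [c]) (don ++ [c]) (r.erase c) := by
          refine ⟨?_, ?_, ?_, ?_, ?_, ?_⟩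
          · simp [List.nodup_append, h1]
            intro a b hab heq
            exact hnotm (heq ▸ hab)
          · intro a ha
            rcases List.mem_append.1 ha with ha | ha
            · exact List.mem_append_left _ (h2 a ha)
            · exact List.mem_append_right _ ha
          · intro a ha
            rcases List.mem_append.1 ha with ha | ha
            · exact h3 a ha
            · simp at ha; subst ha; exact hgc
          · exact h4.erase c
          · intro a hga
            rw [List.Nodup.mem_erase_iff h4, h5 a hga]
            simp [List.mem_append]
            tauto
          · intro a ha
            exact h6 a (List.mem_of_mem_erase ha)
        obtain ⟨⟨new, hq, hd, hadj⟩, hInvF, hlast⟩ :=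
          ih (fun z hz => hcs z (List.mem_cons_of_mem _ hz)) (q ++ [c]) (don ++ [c])
            (r.erase c) hInv'
        refine ⟨⟨c :: new, ?_, ?_, ?_⟩, hInvF, ?_⟩
        · rw [hq, List.append_assoc]; rfl
        · rw [hd, List.append_assoc]; rfl
        · intro a ha
          rcases List.mem_cons.1 ha with ha | ha
          · subst ha
            exact ⟨hgc, hcs _ List.mem_cons_self, hcond.2.2.2.2.2.2.trans hxy.symm⟩
          · exact hadj a ha
        · intro a ha hadja
          rcases List.mem_cons.1 ha with ha | ha
          · subst ha
            rw [hd]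
            exact List.mem_append_left _ (List.mem_append_right _ (by simp))
          · exact hlast a ha hadja
      · have hstep : pvStepB board n m vv (q, don, r) c = (q, don, r) := by
          simp only [pvStepB]
          rw [if_neg hcond]
        rw [hstep]
        obtain ⟨⟨new, hq, hd, hadj⟩, hInvF, hlast⟩ :=
          ih (fun z hz => hcs z (List.mem_cons_of_mem _ hz)) q don r
            ⟨h1, h2, h3, h4, h5, h6⟩
        refine ⟨⟨new, hq, hd, hadj⟩, hInvF, ?_⟩
        intro a ha hadja
        rcases List.mem_cons.1 ha with ha | ha
        · subst ha
          obtain ⟨hga, hoff, hval⟩ := hadja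
          have hvv : pvAt board a.1 a.2 = vv := hval.trans hxy
          have hmem : a ∈ don := by
            by_cases hm : a ∈ don
            · exact hm
            · exfalso
              have hr : a ∈ r := (h5 a hga).2 hm
              exact hcond ⟨hga.1, hga.2.1, hga.2.2.1, hga.2.2.2, hm, hr, hvv⟩
          rw [hd]
          exact List.mem_append_left _ hmem
        · exact hlast a ha hadja

theorem pvFoldA_eq (board : List (List Int)) (n m x y : Int)
    (s0 : List (Int × Int) × List (Int × Int) × List (Int × Int)) :
    pvDIRECTIONS.foldl (pvStepA board n m x y) s0 =
      (pvDIRECTIONS.map (fun d => (x + d.1, y + d.2))).foldl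
        (pvStepB board n m (pvAt board x y)) s0 := by
  rw [List.foldl_map]
  congr 1
  funext s d
  exact pvStepA_eq_stepB board n m x y s d

theorem pvCells_offsets (x y : Int) :
    ∀ c ∈ pvDIRECTIONS.map (fun d => (x + d.1, y + d.2)),
      (c.1 - x, c.2 - y) ∈ pvDIRECTIONS := by
  intro c hc
  obtain ⟨d, hd, rfl⟩ := List.mem_map.1 hc
  simpa using hd

theorem pvAdj_mem_cells (board : List (List Int)) (n m x y : Int) (c' : Int × Int)
    (h : pvAdj board n m (x, y) c') :
    c' ∈ pvDIRECTIONS.map (fun d => (x + d.1, y + d.2)) := by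
  refine List.mem_map.2 ⟨(c'.1 - x, c'.2 - y), h.2.1, ?_⟩
  simp

-- ---------- BFS loop (port A) computes the component ----------
theorem pvBfs_spec (board : List (List Int)) (n m : Int) (P : Int × Int → Prop)
    (hP : ∀ a c, P a → pvAdj board n m a c → P c) :
    ∀ q v r, pvInvM n m q v r → (∀ c ∈ v, P c) →
    (∀ c ∈ v, c ∉ q → ∀ c', pvAdj board n m c c' → c' ∈ v) →
    (pvBfs board n m q v r).Nodup ∧
    (∀ c ∈ v, c ∈ pvBfs board n m q v r) ∧
    (∀ c ∈ pvBfs board n m q v r, P c ∧ pvGrid n m c) ∧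
    (∀ c ∈ pvBfs board n m q v r, ∀ c', pvAdj board n m c c' →
      c' ∈ pvBfs board n m q v r) := by
  intro q v r
  induction q, v, r using pvBfs.induct board n m with
  | case1 v r =>
      intro hInv hPv hcl
      rw [pvBfs]
      exact ⟨hInv.1, fun c hc => hc, fun c hc => ⟨hPv c hc, hInv.2.2.1 c hc⟩,
        fun c hc c' hadj => hcl c hc (by simp) c' hadj⟩
  | case2 v r x y qs sres ih =>
      intro hInv hPv hcl
      rw [pvBfs]
      simp only [sres] at ih
      simp only [pvFoldA_eq] at ih ⊢
      obtain ⟨⟨new, hq, hd, hadj⟩, hInvF, hlast⟩ :=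
        pvFold_spec board n m (pvAt board x y) x y rfl
          (pvDIRECTIONS.map (fun d => (x + d.1, y + d.2))) (pvCells_offsets x y)
          qs v r ⟨hInv.1, fun c hc => hInv.2.1 c (List.mem_cons_of_mem _ hc),
            hInv.2.2.1, hInv.2.2.2.1, hInv.2.2.2.2.1, hInv.2.2.2.2.2⟩
      have hxyv : (x, y) ∈ v := hInv.2.1 (x, y) List.mem_cons_self
      have hPnew : ∀ c ∈ (pvDIRECTIONS.map (fun d => (x + d.1, y + d.2))).foldl
          (pvStepB board n m (pvAt board x y)) (qs, v, r) |>.2.1, P c := by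
        intro c hc
        rw [hd] at hc
        rcases List.mem_append.1 hc with hc | hc
        · exact hPv c hc
        · exact hP (x, y) c (hPv _ hxyv) (hadj c hc)
      have hclnew : ∀ c ∈ ((pvDIRECTIONS.map (fun d => (x + d.1, y + d.2))).foldl
          (pvStepB board n m (pvAt board x y)) (qs, v, r)).2.1,
          c ∉ ((pvDIRECTIONS.map (fun d => (x + d.1, y + d.2))).foldl
            (pvStepB board n m (pvAt board x y)) (qs, v, r)).1 →
          ∀ c', pvAdj board n m c c' →
            c' ∈ ((pvDIRECTIONS.map (fun d => (x + d.1, y + d.2))).foldl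
              (pvStepB board n m (pvAt board x y)) (qs, v, r)).2.1 := by
        intro c hc hcq c' hadj'
        rw [hd] at hc
        rcases List.mem_append.1 hc with hc | hc
        · by_cases hcx : c = (x, y)
          · subst hcx
            exact hlast c' (pvAdj_mem_cells board n m x y c' hadj') hadj'
          · have hnq : c ∉ (x, y) :: qs := by
              intro hmem
              rcases List.mem_cons.1 hmem with h' | h'
              · exact hcx h'
              · exact hcq (by rw [hq]; exact List.mem_append_left _ h')
            have := hcl c hc hnq c' hadj'
            rw [hd]
            exact List.mem_append_left _ this
        · exfalso
          exact hcq (by rw [hq]; exact List.mem_append_right _ hc)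
      obtain ⟨r1, r2, r3, r4⟩ := ih hInvF hPnew hclnew
      refine ⟨r1, ?_, r3, r4⟩
      intro c hc
      refine r2 c ?_
      rw [hd]
      exact List.mem_append_left _ hc

theorem pvBfs_comp (board : List (List Int)) (n m : Int) (s0 : Int × Int)
    (hs0 : pvGrid n m s0) :
    pvCompList board n m s0
      (pvBfs board n m [s0] (PySem.Set.ofList [s0]) ((pvGridCells n m).erase s0)) := by
  have hof : PySem.Set.ofList [s0] = [s0] := rfl
  rw [hof]
  have hInv : pvInvM n m [s0] [s0] ((pvGridCells n m).erase s0) := by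
    refine ⟨by simp, fun c hc => hc, ?_, (pv_nodup_gridCells n m).erase s0, ?_, ?_⟩
    · intro c hc
      simp at hc
      subst hc
      exact hs0
    · intro c hgc
      rw [List.Nodup.mem_erase_iff (pv_nodup_gridCells n m), pv_mem_gridCells]
      simp [hgc]
    · intro c hc
      exact (pv_mem_gridCells n m c).1 (List.mem_of_mem_erase hc)
  obtain ⟨hnd, hsub, hPg, hcl⟩ := pvBfs_spec board n m (pvReach board n m s0)
    (fun a c hPa hadj => Relation.ReflTransGen.tail hPa hadj)
    [s0] [s0] ((pvGridCells n m).erase s0) hInv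
    (by intro c hc; simp at hc; subst hc; exact Relation.ReflTransGen.refl)
    (by intro c hc hq; simp at hc; simp [hc] at hq)
  refine ⟨hnd, fun c => ⟨fun hc => (hPg c hc).1, fun hr => ?_⟩⟩
  induction hr with
  | refl => exact hsub s0 (by simp)
  | tail hstep hadj ih => exact hcl _ ih _ hadj

theorem pvCells_offsets' (x y : Int) :
    ∀ c ∈ [(x, y + 1), (x + 1, y), (x, y - 1), (x - 1, y)],
      (c.1 - x, c.2 - y) ∈ pvDIRECTIONS := by
  intro c hc
  simp at hc
  rcases hc with h | h | h | h <;> subst h <;> simp [pvDIRECTIONS, Prod.ext_iff]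

theorem pvAdj_mem_cells' (board : List (List Int)) (n m x y : Int) (c' : Int × Int)
    (h : pvAdj board n m (x, y) c') :
    c' ∈ [(x, y + 1), (x + 1, y), (x, y - 1), (x - 1, y)] := by
  have hd := h.2.1
  simp [pvDIRECTIONS, Prod.ext_iff] at hd ⊢
  omega

-- ---------- DFS loop (pvFlood) computes the component and extends done ----------
theorem pvDfs_spec (board : List (List Int)) (n m vv : Int) (P : Int × Int → Prop)
    (hP : ∀ a c, P a → pvAdj board n m a c → P c)
    (don0 : List (Int × Int)) :
    ∀ stack don comp r, pvInvM n m stack don r →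
    (∃ Δ, don = don0 ++ Δ ∧ ∀ c, c ∈ Δ ↔ c ∈ comp ++ stack) →
    (comp ++ stack).Nodup →
    (∀ c ∈ comp ++ stack, P c) →
    (∀ c ∈ stack, pvAt board c.1 c.2 = vv) →
    (∀ c ∈ don, c ∉ stack → ∀ c', pvAdj board n m c c' → c' ∈ don) →
    pvInvM n m [] (pvDfs board n m vv stack don comp r).2.1
      (pvDfs board n m vv stack don comp r).2.2 ∧
    (∃ Δ, (pvDfs board n m vv stack don comp r).2.1 = don0 ++ Δ ∧
      ∀ c, c ∈ Δ ↔ c ∈ (pvDfs board n m vv stack don comp r).1) ∧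
    (pvDfs board n m vv stack don comp r).1.Nodup ∧
    (∀ c ∈ (pvDfs board n m vv stack don comp r).1, P c) ∧
    (∀ c ∈ (pvDfs board n m vv stack don comp r).2.1, ∀ c',
      pvAdj board n m c c' → c' ∈ (pvDfs board n m vv stack don comp r).2.1) ∧
    (∀ c ∈ don, c ∈ (pvDfs board n m vv stack don comp r).2.1) := by
  intro stack don comp r
  induction stack, don, comp, r using pvDfs.induct board n m vv with
  | case1 don comp r =>
      intro hInv hΔ hnd hPall hval hcl
      have hres : pvDfs board n m vv [] don comp r = (comp, don, r) := by
        rw [pvDfs]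
        simp
      rw [hres]
      obtain ⟨Δ, hΔ1, hΔ2⟩ := hΔ
      exact ⟨⟨hInv.1, by simp, hInv.2.2.1, hInv.2.2.2.1, hInv.2.2.2.2.1, hInv.2.2.2.2.2⟩,
        ⟨Δ, hΔ1, fun c => by rw [hΔ2]; simp⟩, by simpa using hnd,
        fun c hc => hPall c (by simp [hc]), fun c hc c' hadj => hcl c hc (by simp) c' hadj,
        fun c hc => hc⟩
  | case2 stack don comp r h xy st comp' sres ih =>
      intro hInv hΔ hnd hPall hval hcl
      rw [pvDfs]
      simp only [dif_neg h]
      simp only [xy, st, comp', sres] at ih ⊢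
      -- abbreviations
      have hsplit : stack.dropLast ++ [stack.getLast h] = stack :=
        List.dropLast_append_getLast h
      have hxystack : stack.getLast h ∈ stack := List.getLast_mem h
      have hxyval : pvAt board (stack.getLast h).1 (stack.getLast h).2 = vv :=
        hval _ hxystack
      obtain ⟨h1, h2, h3, h4, h5, h6⟩ := hInv
      obtain ⟨Δ, hΔ1, hΔ2⟩ := hΔ
      have hInvst : pvInvM n m stack.dropLast don r :=
        ⟨h1, fun c hc => h2 c (by rw [← hsplit]; exact List.mem_append_left _ hc),
          h3, h4, h5, h6⟩
      obtain ⟨⟨new, hq, hd, hadj⟩, hInvF, hlast⟩ :=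
        pvFold_spec board n m vv (stack.getLast h).1 (stack.getLast h).2 hxyval
          [((stack.getLast h).1, (stack.getLast h).2 + 1),
           ((stack.getLast h).1 + 1, (stack.getLast h).2),
           ((stack.getLast h).1, (stack.getLast h).2 - 1),
           ((stack.getLast h).1 - 1, (stack.getLast h).2)]
          (pvCells_offsets' (stack.getLast h).1 (stack.getLast h).2)
          stack.dropLast don r hInvst
      have hxypair : ((stack.getLast h).1, (stack.getLast h).2) = stack.getLast h := rfl
      rw [hxypair] at hadj hlast
      -- new is disjoint from don and nodup
      have hdn : (don ++ new).Nodup := by rw [← hd]; exact hInvF.1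
      rw [List.nodup_append] at hdn
      have hsubΔ : ∀ c, c ∈ comp ++ stack → c ∈ don := by
        intro c hc
        rw [hΔ1]
        exact List.mem_append_right _ ((hΔ2 c).2 hc)
      -- hypotheses for ih
      have hΔ' : ∃ Δ', (List.foldl (pvStepB board n m vv) (stack.dropLast, don, r)
            [((stack.getLast h).1, (stack.getLast h).2 + 1),
             ((stack.getLast h).1 + 1, (stack.getLast h).2),
             ((stack.getLast h).1, (stack.getLast h).2 - 1),
             ((stack.getLast h).1 - 1, (stack.getLast h).2)]).2.1 = don0 ++ Δ' ∧
          ∀ c, c ∈ Δ' ↔ c ∈ (comp ++ [stack.getLast h]) ++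
            (List.foldl (pvStepB board n m vv) (stack.dropLast, don, r)
              [((stack.getLast h).1, (stack.getLast h).2 + 1),
               ((stack.getLast h).1 + 1, (stack.getLast h).2),
               ((stack.getLast h).1, (stack.getLast h).2 - 1),
               ((stack.getLast h).1 - 1, (stack.getLast h).2)]).1 := by
        refine ⟨Δ ++ new, by rw [hd, hΔ1, List.append_assoc], fun c => ?_⟩
        rw [hq]
        have h2' := hΔ2 c
        rw [← hsplit] at h2'
        simp only [List.mem_append, List.mem_singleton] at h2' ⊢
        tauto
      have hnd' : ((comp ++ [stack.getLast h]) ++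
          (List.foldl (pvStepB board n m vv) (stack.dropLast, don, r)
            [((stack.getLast h).1, (stack.getLast h).2 + 1),
             ((stack.getLast h).1 + 1, (stack.getLast h).2),
             ((stack.getLast h).1, (stack.getLast h).2 - 1),
             ((stack.getLast h).1 - 1, (stack.getLast h).2)]).1).Nodup := by
        rw [hq]
        have hperm : List.Perm (comp ++ stack) (comp ++ [stack.getLast h] ++ stack.dropLast) := by
          conv_lhs => rw [← hsplit]
          rw [List.append_assoc]
          exact List.Perm.append_left _ (List.perm_append_comm)
        have hn1 : (comp ++ [stack.getLast h] ++ stack.dropLast).Nodup := hperm.nodup hnd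
        rw [← List.append_assoc, List.nodup_append]
        refine ⟨hn1, hdn.2.1, ?_⟩
        intro a ha b hb hab
        subst hab
        have : a ∈ don := by
          apply hsubΔ
          simp only [List.mem_append, List.mem_singleton] at ha
          rcases ha with (ha | ha) | ha
          · exact List.mem_append_left _ ha
          · exact List.mem_append_right _ (ha ▸ hxystack)
          · exact List.mem_append_right _ (List.dropLast_subset _ ha)
        exact hdn.2.2 a this a hb rfl
      have hP' : ∀ c ∈ (comp ++ [stack.getLast h]) ++
          (List.foldl (pvStepB board n m vv) (stack.dropLast, don, r)
            [((stack.getLast h).1, (stack.getLast h).2 + 1),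
             ((stack.getLast h).1 + 1, (stack.getLast h).2),
             ((stack.getLast h).1, (stack.getLast h).2 - 1),
             ((stack.getLast h).1 - 1, (stack.getLast h).2)]).1, P c := by
        intro c hc
        rw [hq] at hc
        simp only [List.mem_append, List.mem_singleton] at hc
        rcases hc with (hc | hc) | hc | hc
        · exact hPall c (List.mem_append_left _ hc)
        · exact hc ▸ hPall _ (List.mem_append_right _ hxystack)
        · exact hPall c (List.mem_append_right _ (List.dropLast_subset _ hc))
        · exact hP _ c (hPall _ (List.mem_append_right _ hxystack)) (hadj c hc)
      have hval' : ∀ c ∈ (List.foldl (pvStepB board n m vv) (stack.dropLast, don, r)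
            [((stack.getLast h).1, (stack.getLast h).2 + 1),
             ((stack.getLast h).1 + 1, (stack.getLast h).2),
             ((stack.getLast h).1, (stack.getLast h).2 - 1),
             ((stack.getLast h).1 - 1, (stack.getLast h).2)]).1,
          pvAt board c.1 c.2 = vv := by
        intro c hc
        rw [hq] at hc
        rcases List.mem_append.1 hc with hc | hc
        · exact hval c (List.dropLast_subset _ hc)
        · exact (hadj c hc).2.2.trans hxyval
      have hcl' : ∀ c ∈ (List.foldl (pvStepB board n m vv) (stack.dropLast, don, r)
            [((stack.getLast h).1, (stack.getLast h).2 + 1),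
             ((stack.getLast h).1 + 1, (stack.getLast h).2),
             ((stack.getLast h).1, (stack.getLast h).2 - 1),
             ((stack.getLast h).1 - 1, (stack.getLast h).2)]).2.1,
          c ∉ (List.foldl (pvStepB board n m vv) (stack.dropLast, don, r)
            [((stack.getLast h).1, (stack.getLast h).2 + 1),
             ((stack.getLast h).1 + 1, (stack.getLast h).2),
             ((stack.getLast h).1, (stack.getLast h).2 - 1),
             ((stack.getLast h).1 - 1, (stack.getLast h).2)]).1 →
          ∀ c', pvAdj board n m c c' →
            c' ∈ (List.foldl (pvStepB board n m vv) (stack.dropLast, don, r)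
              [((stack.getLast h).1, (stack.getLast h).2 + 1),
               ((stack.getLast h).1 + 1, (stack.getLast h).2),
               ((stack.getLast h).1, (stack.getLast h).2 - 1),
               ((stack.getLast h).1 - 1, (stack.getLast h).2)]).2.1 := by
        intro c hc hcs' c' hadj'
        rw [hd] at hc
        rcases List.mem_append.1 hc with hc | hc
        · by_cases hcx : c = stack.getLast h
          · have hadj2 : pvAdj board n m ((stack.getLast h).1, (stack.getLast h).2) c' := by
              rw [hxypair]
              exact hcx ▸ hadj'
            exact hlast c'
              (pvAdj_mem_cells' board n m (stack.getLast h).1 (stack.getLast h).2 c' hadj2)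
              hadj2
          · have hns : c ∉ stack := by
              intro hmem
              have hmem' : c ∈ stack.dropLast ++ [stack.getLast h] := by rw [hsplit]; exact hmem
              rcases List.mem_append.1 hmem' with hmem'' | hmem''
              · exact hcs' (by rw [hq]; exact List.mem_append_left _ hmem'')
              · simp at hmem''
                exact hcx hmem''
            have := hcl c hc hns c' hadj'
            rw [hd]
            exact List.mem_append_left _ this
        · exfalso
          exact hcs' (by rw [hq]; exact List.mem_append_right _ hc)
      obtain ⟨r1, r2, r3, r4, r5, r6⟩ := ih hInvF hΔ' hnd' hP' hval' hcl'
      exact ⟨r1, r2, r3, r4, r5, fun c hc => r6 c (by rw [hd]; exact List.mem_append_left _ hc)⟩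

-- wrapper: the DFS call made by pvFlood, with everything the outer loop needs
theorem pvDfs_comp (board : List (List Int)) (n m : Int) (don0 r0 : List (Int × Int))
    (s0 : Int × Int) (hs0 : pvGrid n m s0) (hns0 : s0 ∉ don0)
    (hnd : don0.Nodup) (hgd : ∀ c ∈ don0, pvGrid n m c)
    (hcl0 : ∀ c ∈ don0, ∀ c', pvAdj board n m c c' → c' ∈ don0)
    (hnr : r0.Nodup) (hcomp : ∀ c, pvGrid n m c → (c ∈ r0 ↔ c ∉ don0))
    (hgr : ∀ c ∈ r0, pvGrid n m c) :
    pvCompList board n m s0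
      (pvDfs board n m (pvAt board s0.1 s0.2) [s0] (PySem.Set.add don0 s0) [] (r0.erase s0)).1 ∧
    (∀ c, c ∈ (pvDfs board n m (pvAt board s0.1 s0.2) [s0] (PySem.Set.add don0 s0) [] (r0.erase s0)).2.1 ↔
      (c ∈ don0 ∨ c ∈ (pvDfs board n m (pvAt board s0.1 s0.2) [s0] (PySem.Set.add don0 s0) [] (r0.erase s0)).1)) ∧
    pvInvM n m [] (pvDfs board n m (pvAt board s0.1 s0.2) [s0] (PySem.Set.add don0 s0) [] (r0.erase s0)).2.1
      (pvDfs board n m (pvAt board s0.1 s0.2) [s0] (PySem.Set.add don0 s0) [] (r0.erase s0)).2.2 ∧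
    (∀ c ∈ (pvDfs board n m (pvAt board s0.1 s0.2) [s0] (PySem.Set.add don0 s0) [] (r0.erase s0)).2.1,
      ∀ c', pvAdj board n m c c' →
        c' ∈ (pvDfs board n m (pvAt board s0.1 s0.2) [s0] (PySem.Set.add don0 s0) [] (r0.erase s0)).2.1) := by
  have hadd : PySem.Set.add don0 s0 = don0 ++ [s0] := by
    simp [PySem.Set.add, PySem.Set.contains, hns0]
  rw [hadd]
  have hInv : pvInvM n m [s0] (don0 ++ [s0]) (r0.erase s0) := by
    refine ⟨?_, fun c hc => List.mem_append_right _ hc, ?_, hnr.erase s0, ?_, ?_⟩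
    · simp [List.nodup_append, hnd]
      intro a b hab heq
      exact hns0 (heq ▸ hab)
    · intro c hc
      rcases List.mem_append.1 hc with hc | hc
      · exact hgd c hc
      · simp at hc; subst hc; exact hs0
    · intro c hgc
      rw [List.Nodup.mem_erase_iff hnr, hcomp c hgc]
      simp [List.mem_append]
      tauto
    · intro c hc
      exact hgr c (List.mem_of_mem_erase hc)
  obtain ⟨hInvF, ⟨Δ, hΔ1, hΔ2⟩, hndc, hPc, hclF, hmono⟩ :=
    pvDfs_spec board n m (pvAt board s0.1 s0.2) (pvReach board n m s0)
      (fun a c hPa hadj => Relation.ReflTransGen.tail hPa hadj)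
      don0
      [s0] (don0 ++ [s0]) [] (r0.erase s0) hInv
      ⟨[s0], rfl, by simp⟩ (by simp)
      (by intro c hc; simp at hc; subst hc; exact Relation.ReflTransGen.refl)
      (by intro c hc; simp at hc; subst hc; rfl)
      (by
        intro c hc hcs c' hadj
        rcases List.mem_append.1 hc with hc' | hc'
        · exact List.mem_append_left _ (hcl0 c hc' c' hadj)
        · exfalso; simp at hc'; exact hcs (by simp [hc']))
  -- disjointness of don0 and Δ
  have hdisj : ∀ a ∈ Δ, a ∉ don0 := by
    have := hInvF.1
    rw [hΔ1, List.nodup_append] at this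
    intro a ha hain
    exact this.2.2 a hain a ha rfl
  have hmemdone : ∀ c, c ∈ (pvDfs board n m (pvAt board s0.1 s0.2) [s0] (don0 ++ [s0]) [] (r0.erase s0)).2.1 ↔
      (c ∈ don0 ∨ c ∈ (pvDfs board n m (pvAt board s0.1 s0.2) [s0] (don0 ++ [s0]) [] (r0.erase s0)).1) := by
    intro c
    rw [hΔ1]
    simp only [List.mem_append]
    rw [hΔ2]
  have hs0comp : s0 ∈ (pvDfs board n m (pvAt board s0.1 s0.2) [s0] (don0 ++ [s0]) [] (r0.erase s0)).1 := by
    rw [← hΔ2]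
    have : s0 ∈ (pvDfs board n m (pvAt board s0.1 s0.2) [s0] (don0 ++ [s0]) [] (r0.erase s0)).2.1 :=
      hmono s0 (List.mem_append_right _ (by simp))
    rw [hΔ1] at this
    rcases List.mem_append.1 this with h' | h'
    · exact absurd h' hns0
    · exact h'
  refine ⟨⟨hndc, fun c => ⟨fun hc => hPc c hc, fun hr => ?_⟩⟩, hmemdone, hInvF, hclF⟩
  induction hr with
  | refl => exact hs0comp
  | @tail b cc hstep hadj ih =>
      have hbdone : b ∈ (pvDfs board n m (pvAt board s0.1 s0.2) [s0] (don0 ++ [s0]) [] (r0.erase s0)).2.1 := by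
        rw [hmemdone]; exact Or.inr ih
      have hcdone := hclF b hbdone cc hadj
      rw [hmemdone] at hcdone
      rcases hcdone with hcdone | hcdone
      · exfalso
        have hbgrid : pvGrid n m b := hInvF.2.2.1 b hbdone
        have hbin : b ∈ don0 := hcl0 cc hcdone b (pvAdj_symm board n m hbgrid hadj)
        have hbΔ : b ∈ Δ := by rw [hΔ2]; exact ih
        exact hdisj b hbΔ hbin
      · exact hcdone

-- ---------- score-matrix lemmas ----------
def pvShape (S : List (List Int)) (n m : Nat) : Prop :=
  S.length = n ∧ ∀ row ∈ S, row.length = m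

theorem pvShape_init (n m : Nat) :
    pvShape (List.replicate n (List.replicate m (0 : Int))) n m := by
  constructor
  · simp
  · intro row hrow
    rw [List.eq_of_mem_replicate hrow]; simp

theorem pvGetD_cases {α : Type} (xs : List α) (i : Int) (d : α) :
    PySem.List.pyGetD xs i d ∈ xs ∨ PySem.List.pyGetD xs i d = d := by
  by_cases h : PySem.Raise.InRange xs.length i
  · exact Or.inl (PySem.List.pyGetD_mem xs d h)
  · exact Or.inr (PySem.List.pyGetD_of_none xs i d ((PySem.List.pyGet?_eq_none_iff xs i).2 h))

theorem pvAt_init (n m : Nat) (i j : Int) :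
    pvAt (List.replicate n (List.replicate m (0 : Int))) i j = 0 := by
  unfold pvAt
  rcases pvGetD_cases (List.replicate n (List.replicate m (0 : Int))) i [] with h | h
  · rw [List.eq_of_mem_replicate h]
    rcases pvGetD_cases (List.replicate m (0 : Int)) j 0 with h' | h'
    · exact List.eq_of_mem_replicate h'
    · exact h'
  · rw [h]
    rcases pvGetD_cases ([] : List Int) j 0 with h2 | h2
    · simp at h2
    · exact h2

theorem pvShape_set2 (S : List (List Int)) (n m : Nat) (x y v : Int)
    (hS : pvShape S n m) (hx : 0 ≤ x) (hy : 0 ≤ y) : pvShape (pvSet2 S x y v) n m := by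
  unfold pvSet2
  rw [PySem.List.pySetD_of_nonneg _ _ hx]
  by_cases hxlen : x < (S.length : Int)
  · refine ⟨by rw [List.length_set]; exact hS.1, ?_⟩
    intro row hrow
    rcases List.mem_or_eq_of_mem_set hrow with h | h
    · exact hS.2 row h
    · subst h
      rw [PySem.List.pySetD_of_nonneg _ _ hy, List.length_set]
      rw [PySem.List.pyGetD_eq_getElem S [] hx hxlen]
      exact hS.2 _ (List.getElem_mem _)
  · rw [List.set_eq_of_length_le (by omega)]
    exact hS

theorem pvAt_set2 (S : List (List Int)) (n m : Nat) (x y v i j : Int)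
    (hS : pvShape S n m) (hx : 0 ≤ x) (hxn : x < (n : Int)) (hy : 0 ≤ y)
    (hym : y < (m : Int)) (hi : 0 ≤ i) (hj : 0 ≤ j) :
    pvAt (pvSet2 S x y v) i j = if i = x ∧ j = y then v else pvAt S i j := by
  obtain ⟨xN, rfl⟩ : ∃ k : Nat, ((k : Int) = x) := ⟨x.toNat, Int.toNat_of_nonneg hx⟩
  obtain ⟨yN, rfl⟩ : ∃ k : Nat, ((k : Int) = y) := ⟨y.toNat, Int.toNat_of_nonneg hy⟩
  obtain ⟨iN, rfl⟩ : ∃ k : Nat, ((k : Int) = i) := ⟨i.toNat, Int.toNat_of_nonneg hi⟩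
  obtain ⟨jN, rfl⟩ : ∃ k : Nat, ((k : Int) = j) := ⟨j.toNat, Int.toNat_of_nonneg hj⟩
  have hlen : S.length = n := hS.1
  have hxlt : xN < S.length := by omega
  have hrow : S.getD xN [] = S[xN] := List.getD_eq_getElem S [] hxlt
  have hrowlen : (S[xN] : List Int).length = m := hS.2 _ (List.getElem_mem _)
  unfold pvAt pvSet2
  simp only [PySem.List.pySetD_natCast, PySem.List.pyGetD_natCast]
  by_cases hix : iN = xN
  · subst hix
    have h1 : (S.set iN ((S.getD iN []).set yN v)).getD iN [] = (S.getD iN []).set yN v := by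
      rw [List.getD_eq_getElem?_getD, List.getElem?_set]
      simp [hxlt]
    rw [h1]
    by_cases hjy : jN = yN
    · subst hjy
      rw [if_pos ⟨rfl, rfl⟩]
      rw [List.getD_eq_getElem?_getD, List.getElem?_set]
      rw [hrow]
      have : jN < (S[iN] : List Int).length := by omega
      simp [this]
    · rw [if_neg (by simp [Nat.cast_inj]; intro; omega)]
      rw [List.getD_eq_getElem?_getD, List.getElem?_set, if_neg (by omega)]
      rw [← List.getD_eq_getElem?_getD]
  · have h1 : (S.set xN ((S.getD xN []).set yN v)).getD iN [] = S.getD iN [] := by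
      rw [List.getD_eq_getElem?_getD, List.getElem?_set, if_neg (by omega)]
      rw [← List.getD_eq_getElem?_getD]
    rw [h1, if_neg (by simp [Nat.cast_inj]; intro h; omega)]

theorem pvShape_foldWrites (g : Int × Int → Int) (n m : Nat) :
    ∀ (L : List (Int × Int)) (S : List (List Int)), pvShape S n m →
    (∀ c ∈ L, pvGrid (n : Int) (m : Int) c) →
    pvShape (L.foldl (fun sb c => pvSet2 sb c.1 c.2 (g c)) S) n m := by
  intro L
  induction L with
  | nil => intro S hS _; exact hS
  | cons a L ih =>
      intro S hS hL
      refine ih _ (pvShape_set2 S n m a.1 a.2 (g a) hS ?_ ?_)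
        (fun c hc => hL c (List.mem_cons_of_mem _ hc))
      · exact (hL a List.mem_cons_self).1
      · exact (hL a List.mem_cons_self).2.2.1

theorem pvAt_foldWrites (g : Int × Int → Int) (n m : Nat) :
    ∀ (L : List (Int × Int)) (S : List (List Int)), pvShape S n m →
    (∀ c ∈ L, pvGrid (n : Int) (m : Int) c) → ∀ i j : Int, 0 ≤ i → 0 ≤ j →
    pvAt (L.foldl (fun sb c => pvSet2 sb c.1 c.2 (g c)) S) i j =
      if (i, j) ∈ L then g (i, j) else pvAt S i j := by
  intro L
  induction L with
  | nil => intro S hS _ i j hi hj; simp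
  | cons a L ih =>
      intro S hS hL i j hi hj
      obtain ⟨a1, a2⟩ := a
      have hga : pvGrid (n : Int) (m : Int) (a1, a2) := hL _ List.mem_cons_self
      have hstep := pvAt_set2 S n m a1 a2 (g (a1, a2)) i j hS hga.1 hga.2.1 hga.2.2.1
        hga.2.2.2 hi hj
      rw [List.foldl_cons]
      rw [ih (pvSet2 S a1 a2 (g (a1, a2)))
        (pvShape_set2 S n m a1 a2 (g (a1, a2)) hS hga.1 hga.2.2.1)
        (fun c hc => hL c (List.mem_cons_of_mem _ hc)) i j hi hj]
      by_cases hmem : (i, j) ∈ L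
      · rw [if_pos hmem, if_pos (List.mem_cons_of_mem _ hmem)]
      · rw [if_neg hmem, hstep]
        by_cases hia : i = a1 ∧ j = a2
        · obtain ⟨rfl, rfl⟩ := hia
          rw [if_pos ⟨rfl, rfl⟩, if_pos List.mem_cons_self]
        · rw [if_neg hia, if_neg ?_]
          intro hc
          rcases List.mem_cons.1 hc with hc | hc
          · rw [Prod.ext_iff] at hc
            exact hia hc
          · exact hmem hc

theorem pvMat_ext (S T : List (List Int)) (n m : Nat) (hS : pvShape S n m)
    (hT : pvShape T n m)
    (h : ∀ i j : Nat, i < n → j < m → pvAt S i j = pvAt T i j) : S = T := by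
  have hlen : S.length = T.length := by rw [hS.1, hT.1]
  refine List.ext_getElem hlen ?_
  intro iN h1 h2
  have hrS : (S[iN] : List Int).length = m := hS.2 _ (List.getElem_mem _)
  have hrT : (T[iN] : List Int).length = m := hT.2 _ (List.getElem_mem _)
  refine List.ext_getElem (by rw [hrS, hrT]) ?_
  intro jN g1 g2
  have hin : iN < n := by rw [← hS.1]; exact h1
  have hjm : jN < m := by rw [← hrS]; exact g1
  have := h iN jN hin hjm
  unfold pvAt at this
  rw [PySem.List.pyGetD_natCast, PySem.List.pyGetD_natCast,
      PySem.List.pyGetD_natCast, PySem.List.pyGetD_natCast] at this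
  rw [List.getD_eq_getElem S [] h1, List.getD_eq_getElem T [] h2] at this
  rw [List.getD_eq_getElem _ 0 g1, List.getD_eq_getElem _ 0 g2] at this
  exact this

-- ---------- the simulation invariant between A's outer loops and pvFlood's ----------
def pvRel (board : List (List Int)) (n m : Int) (sbA : List (List Int))
    (st : List (List Int) × List (Int × Int) × List (Int × Int)) : Prop :=
  sbA = st.1 ∧ pvShape st.1 n.toNat m.toNat ∧
  st.2.1.Nodup ∧ (∀ c ∈ st.2.1, pvGrid n m c) ∧
  (∀ c ∈ st.2.1, ∀ c', pvAdj board n m c c' → c' ∈ st.2.1) ∧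
  st.2.2.Nodup ∧ (∀ c, pvGrid n m c → (c ∈ st.2.2 ↔ c ∉ st.2.1)) ∧
  (∀ c ∈ st.2.2, pvGrid n m c) ∧
  (∀ c ∈ st.2.1, ∃ L, pvCompList board n m c L ∧
    pvAt st.1 c.1 c.2 = pvAt board c.1 c.2 * L.length) ∧
  (∀ c, pvGrid n m c → c ∉ st.2.1 → pvAt st.1 c.1 c.2 = 0)

theorem pvReach_closed (board : List (List Int)) (n m : Int) (D : List (Int × Int))
    (hCl : ∀ c ∈ D, ∀ c', pvAdj board n m c c' → c' ∈ D) {a b : Int × Int}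
    (ha : a ∈ D) (h : pvReach board n m a b) : b ∈ D := by
  induction h with
  | refl => exact ha
  | tail hr hadj ih => exact hCl _ ih _ hadj

theorem pvRel_step (board : List (List Int)) (n m : Int) (sbA : List (List Int))
    (st : List (List Int) × List (Int × Int) × List (Int × Int))
    (sx sy : Int) (hg : pvGrid n m (sx, sy)) (hR : pvRel board n m sbA st) :
    pvRel board n m
      (if pvAt sbA sx sy ≠ 0 then sbA
       else
         let visited := pvBfs board n m [(sx, sy)] (PySem.Set.ofList [(sx, sy)])
           ((pvGridCells n m).erase (sx, sy))
         visited.foldl (fun sb c =>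
           pvSet2 sb c.1 c.2 (pvAt board c.1 c.2 * (visited.length : Int))) sbA)
      (if (sx, sy) ∈ st.2.1 then st
       else
         let v := pvAt board sx sy
         let res := pvDfs board n m v [(sx, sy)] (PySem.Set.add st.2.1 (sx, sy)) []
           (st.2.2.erase (sx, sy))
         let score := v * (res.1.length : Int)
         (res.1.foldl (fun sb (c : Int × Int) => pvSet2 sb c.1 c.2 score) st.1,
           res.2.1, res.2.2)) := by
  obtain ⟨hEq, hShape, hNd, hGd, hCl, hNr, hCompl, hGr, hScore, hZero⟩ := hR
  have hnn : ((n.toNat : Nat) : Int) = n := by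
    have := hg.1; have := hg.2.1; omega
  have hmm : ((m.toNat : Nat) : Int) = m := by
    have := hg.2.2.1; have := hg.2.2.2; omega
  have hgrid' : ∀ c : Int × Int, pvGrid n m c ↔ pvGrid ((n.toNat : Nat) : Int) ((m.toNat : Nat) : Int) c := by
    intro c; rw [hnn, hmm]
  by_cases hdone : (sx, sy) ∈ st.2.1
  · -- pvFlood skips; A either skips or rewrites a zero component with zeros
    rw [if_pos hdone]
    obtain ⟨L, hLcomp, hLval⟩ := hScore _ hdone
    have hsval : pvAt sbA sx sy = pvAt board sx sy * L.length := by rw [hEq]; exact hLval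
    by_cases hz : pvAt sbA sx sy ≠ 0
    · rw [if_pos hz]
      exact ⟨hEq, hShape, hNd, hGd, hCl, hNr, hCompl, hGr, hScore, hZero⟩
    · rw [if_neg hz]
      push Not at hz
      have hL0 : (sx, sy) ∈ L := (hLcomp.2 _).2 Relation.ReflTransGen.refl
      have hLpos : L.length ≠ 0 := by
        intro h0; rw [List.length_eq_zero_iff] at h0; simp [h0] at hL0
      have hv0 : pvAt board sx sy = 0 := by
        rw [hsval] at hz
        rcases mul_eq_zero.1 hz with h' | h'
        · exact h'
        · exfalso; exact hLpos (by exact_mod_cast h')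
      have hV := pvBfs_comp board n m (sx, sy) hg
      have hVgrid : ∀ c ∈ pvBfs board n m [(sx, sy)] (PySem.Set.ofList [(sx, sy)])
          ((pvGridCells n m).erase (sx, sy)), pvGrid n m c := by
        intro c hc
        exact pvReach_grid board n m hg ((hV.2 c).1 hc)
      have hVdone : ∀ c ∈ pvBfs board n m [(sx, sy)] (PySem.Set.ofList [(sx, sy)])
          ((pvGridCells n m).erase (sx, sy)), c ∈ st.2.1 := by
        intro c hc
        exact pvReach_closed board n m st.2.1 hCl hdone ((hV.2 c).1 hc)
      have hW : (pvBfs board n m [(sx, sy)] (PySem.Set.ofList [(sx, sy)])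
            ((pvGridCells n m).erase (sx, sy))).foldl
          (fun sb c => pvSet2 sb c.1 c.2 (pvAt board c.1 c.2 *
            ((pvBfs board n m [(sx, sy)] (PySem.Set.ofList [(sx, sy)])
              ((pvGridCells n m).erase (sx, sy))).length : Int))) sbA = sbA := by
        have hShapeA : pvShape sbA n.toNat m.toNat := by rw [hEq]; exact hShape
        refine pvMat_ext _ _ n.toNat m.toNat
          (pvShape_foldWrites _ n.toNat m.toNat _ sbA hShapeA
            (fun c hc => by rw [← hgrid']; exact hVgrid c hc)) hShapeA ?_
        intro iN jN h1 h2
        rw [pvAt_foldWrites _ n.toNat m.toNat _ sbA hShapeA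
          (fun c hc => by rw [← hgrid']; exact hVgrid c hc) iN jN (by positivity) (by positivity)]
        by_cases hmem : ((iN : Int), (jN : Int)) ∈ pvBfs board n m [(sx, sy)]
            (PySem.Set.ofList [(sx, sy)]) ((pvGridCells n m).erase (sx, sy))
        · rw [if_pos hmem]
          have hreach := (hV.2 _).1 hmem
          have hval0 : pvAt board iN jN = 0 := by
            have := pvReach_val board n m hreach
            simp only at this
            rw [this]; exact hv0
          rw [hval0, zero_mul]
          obtain ⟨L', hL'comp, hL'val⟩ := hScore _ (hVdone _ hmem)
          rw [hEq, hL'val]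
          simp only at hval0
          rw [hval0, zero_mul]
        · rw [if_neg hmem]
      rw [hW]
      exact ⟨hEq, hShape, hNd, hGd, hCl, hNr, hCompl, hGr, hScore, hZero⟩
  · -- both sides process a fresh component
    rw [if_neg hdone]
    have hz0 : pvAt sbA sx sy = 0 := by rw [hEq]; exact hZero _ hg hdone
    rw [if_neg (by rw [hz0]; simp)]
    obtain ⟨hC, hmemdone, hInvF, hclF⟩ :=
      pvDfs_comp board n m st.2.1 st.2.2 (sx, sy) hg hdone hNd hGd hCl hNr hCompl hGr
    have hV := pvBfs_comp board n m (sx, sy) hg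
    have hlenVC : (pvBfs board n m [(sx, sy)] (PySem.Set.ofList [(sx, sy)])
        ((pvGridCells n m).erase (sx, sy))).length =
        (pvDfs board n m (pvAt board sx sy) [(sx, sy)] (PySem.Set.add st.2.1 (sx, sy)) []
          (st.2.2.erase (sx, sy))).1.length :=
      pvCompList_length board n m hV hC
    have hVgrid : ∀ c ∈ pvBfs board n m [(sx, sy)] (PySem.Set.ofList [(sx, sy)])
        ((pvGridCells n m).erase (sx, sy)), pvGrid n m c :=
      fun c hc => pvReach_grid board n m hg ((hV.2 c).1 hc)
    have hCgrid : ∀ c ∈ (pvDfs board n m (pvAt board sx sy) [(sx, sy)]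
        (PySem.Set.add st.2.1 (sx, sy)) [] (st.2.2.erase (sx, sy))).1, pvGrid n m c :=
      fun c hc => pvReach_grid board n m hg ((hC.2 c).1 hc)
    have hCdisj : ∀ c ∈ (pvDfs board n m (pvAt board sx sy) [(sx, sy)]
        (PySem.Set.add st.2.1 (sx, sy)) [] (st.2.2.erase (sx, sy))).1, c ∉ st.2.1 := by
      intro c hc hcd
      have hreach := (hC.2 c).1 hc
      have hback := pvReach_symm board n m hg hreach
      exact hdone (pvReach_closed board n m st.2.1 hCl hcd hback)
    have hShapeB : pvShape st.1 n.toNat m.toNat := hShape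
    have hShapeA : pvShape sbA n.toNat m.toNat := by rw [hEq]; exact hShape
    have hsame : (pvBfs board n m [(sx, sy)] (PySem.Set.ofList [(sx, sy)])
          ((pvGridCells n m).erase (sx, sy))).foldl
        (fun sb c => pvSet2 sb c.1 c.2 (pvAt board c.1 c.2 *
          ((pvBfs board n m [(sx, sy)] (PySem.Set.ofList [(sx, sy)])
            ((pvGridCells n m).erase (sx, sy))).length : Int))) sbA =
        (pvDfs board n m (pvAt board sx sy) [(sx, sy)] (PySem.Set.add st.2.1 (sx, sy)) []
          (st.2.2.erase (sx, sy))).1.foldl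
        (fun sb (c : Int × Int) => pvSet2 sb c.1 c.2 (pvAt board sx sy *
          ((pvDfs board n m (pvAt board sx sy) [(sx, sy)] (PySem.Set.add st.2.1 (sx, sy)) []
            (st.2.2.erase (sx, sy))).1.length : Int))) st.1 := by
      refine pvMat_ext _ _ n.toNat m.toNat
        (pvShape_foldWrites _ n.toNat m.toNat _ sbA hShapeA
          (fun c hc => by rw [← hgrid']; exact hVgrid c hc))
        (pvShape_foldWrites _ n.toNat m.toNat _ st.1 hShapeB
          (fun c hc => by rw [← hgrid']; exact hCgrid c hc)) ?_
      intro iN jN h1 h2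
      rw [pvAt_foldWrites _ n.toNat m.toNat _ sbA hShapeA
        (fun c hc => by rw [← hgrid']; exact hVgrid c hc) iN jN (by positivity) (by positivity)]
      rw [pvAt_foldWrites _ n.toNat m.toNat _ st.1 hShapeB
        (fun c hc => by rw [← hgrid']; exact hCgrid c hc) iN jN (by positivity) (by positivity)]
      have hmemiff : (((iN : Int), (jN : Int)) ∈ pvBfs board n m [(sx, sy)]
          (PySem.Set.ofList [(sx, sy)]) ((pvGridCells n m).erase (sx, sy))) ↔
          (((iN : Int), (jN : Int)) ∈ (pvDfs board n m (pvAt board sx sy) [(sx, sy)]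
            (PySem.Set.add st.2.1 (sx, sy)) [] (st.2.2.erase (sx, sy))).1) := by
        rw [hV.2, hC.2]
      by_cases hmem : ((iN : Int), (jN : Int)) ∈ pvBfs board n m [(sx, sy)]
          (PySem.Set.ofList [(sx, sy)]) ((pvGridCells n m).erase (sx, sy))
      · rw [if_pos hmem, if_pos (hmemiff.1 hmem), hlenVC]
        have := pvReach_val board n m ((hV.2 _).1 hmem)
        simp only at this
        rw [this]
      · rw [if_neg hmem, if_neg (fun hc => hmem (hmemiff.2 hc)), hEq]
    rw [hsame]
    have hentry : ∀ i j : Int, 0 ≤ i → 0 ≤ j →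
        pvAt ((pvDfs board n m (pvAt board sx sy) [(sx, sy)] (PySem.Set.add st.2.1 (sx, sy)) []
          (st.2.2.erase (sx, sy))).1.foldl
          (fun sb (c : Int × Int) => pvSet2 sb c.1 c.2 (pvAt board sx sy *
            ((pvDfs board n m (pvAt board sx sy) [(sx, sy)] (PySem.Set.add st.2.1 (sx, sy)) []
              (st.2.2.erase (sx, sy))).1.length : Int))) st.1) i j =
        if (i, j) ∈ (pvDfs board n m (pvAt board sx sy) [(sx, sy)]
            (PySem.Set.add st.2.1 (sx, sy)) [] (st.2.2.erase (sx, sy))).1 then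
          pvAt board sx sy * ((pvDfs board n m (pvAt board sx sy) [(sx, sy)]
            (PySem.Set.add st.2.1 (sx, sy)) [] (st.2.2.erase (sx, sy))).1.length : Int)
        else pvAt st.1 i j := by
      intro i j hi hj
      exact pvAt_foldWrites _ n.toNat m.toNat _ st.1 hShapeB
        (fun c hc => by rw [← hgrid']; exact hCgrid c hc) i j hi hj
    refine ⟨rfl, ?_, hInvF.1, hInvF.2.2.1, hclF, hInvF.2.2.2.1, hInvF.2.2.2.2.1,
      hInvF.2.2.2.2.2, ?_, ?_⟩
    · exact pvShape_foldWrites _ n.toNat m.toNat _ st.1 hShapeB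
        (fun c hc => by rw [← hgrid']; exact hCgrid c hc)
    · intro c hc
      rw [hmemdone] at hc
      obtain ⟨c1, c2⟩ := c
      rcases hc with hc | hc
      · obtain ⟨L, hLcomp, hLval⟩ := hScore _ hc
        refine ⟨L, hLcomp, ?_⟩
        have hgc : pvGrid n m (c1, c2) := hGd _ hc
        rw [hentry c1 c2 hgc.1 hgc.2.2.1,
          if_neg (fun hmem => hCdisj _ hmem hc)]
        exact hLval
      · have hreach := (hC.2 _).1 hc
        have hgc : pvGrid n m (c1, c2) := pvReach_grid board n m hg hreach
        refine ⟨(pvDfs board n m (pvAt board sx sy) [(sx, sy)]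
          (PySem.Set.add st.2.1 (sx, sy)) [] (st.2.2.erase (sx, sy))).1,
          pvCompList_congr board n m hg hreach hC, ?_⟩
        rw [hentry c1 c2 hgc.1 hgc.2.2.1, if_pos hc]
        have := pvReach_val board n m hreach
        simp only at this
        rw [this]
    · intro c hgc hc
      rw [hmemdone] at hc
      push Not at hc
      obtain ⟨c1, c2⟩ := c
      rw [hentry c1 c2 hgc.1 hgc.2.2.1, if_neg hc.2]
      exact hZero _ hgc hc.1

theorem pvRel_foldInner (board : List (List Int)) (n m sx : Int)
    (hsx : 0 ≤ sx ∧ sx < n) :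
    ∀ (ys : List Int), (∀ y ∈ ys, 0 ≤ y ∧ y < m) →
    ∀ sbA st, pvRel board n m sbA st →
    pvRel board n m
      (ys.foldl (fun sb sy =>
        if pvAt sb sx sy ≠ 0 then sb
        else
          let visited := pvBfs board n m [(sx, sy)] (PySem.Set.ofList [(sx, sy)])
            ((pvGridCells n m).erase (sx, sy))
          visited.foldl (fun sb c =>
            pvSet2 sb c.1 c.2 (pvAt board c.1 c.2 * (visited.length : Int))) sb) sbA)
      (ys.foldl (fun (st : List (List Int) × List (Int × Int) × List (Int × Int)) sy =>
        if (sx, sy) ∈ st.2.1 then st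
        else
          let v := pvAt board sx sy
          let res := pvDfs board n m v [(sx, sy)] (PySem.Set.add st.2.1 (sx, sy)) []
            (st.2.2.erase (sx, sy))
          let score := v * (res.1.length : Int)
          (res.1.foldl (fun sb (c : Int × Int) => pvSet2 sb c.1 c.2 score) st.1,
            res.2.1, res.2.2)) st) := by
  intro ys
  induction ys with
  | nil => intro _ sbA st h; exact h
  | cons y ys ih =>
      intro hys sbA st h
      simp only [List.foldl_cons]
      refine ih (fun z hz => hys z (List.mem_cons_of_mem _ hz)) _ _ ?_
      have hy := hys y List.mem_cons_self
      exact pvRel_step board n m sbA st sx y ⟨hsx.1, hsx.2, hy.1, hy.2⟩ h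

theorem pvRel_foldOuter (board : List (List Int)) (n m : Int) :
    ∀ (xs : List Int), (∀ x ∈ xs, 0 ≤ x ∧ x < n) →
    ∀ sbA st, pvRel board n m sbA st →
    pvRel board n m
      (xs.foldl (fun sb sx =>
        (PySem.List.pyRange 0 m 1).foldl (fun sb sy =>
          if pvAt sb sx sy ≠ 0 then sb
          else
            let visited := pvBfs board n m [(sx, sy)] (PySem.Set.ofList [(sx, sy)])
              ((pvGridCells n m).erase (sx, sy))
            visited.foldl (fun sb c =>
              pvSet2 sb c.1 c.2 (pvAt board c.1 c.2 * (visited.length : Int))) sb) sb) sbA)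
      (xs.foldl (fun (st : List (List Int) × List (Int × Int) × List (Int × Int)) sx =>
        (PySem.List.pyRange 0 m 1).foldl
          (fun (st : List (List Int) × List (Int × Int) × List (Int × Int)) sy =>
          if (sx, sy) ∈ st.2.1 then st
          else
            let v := pvAt board sx sy
            let res := pvDfs board n m v [(sx, sy)] (PySem.Set.add st.2.1 (sx, sy)) []
              (st.2.2.erase (sx, sy))
            let score := v * (res.1.length : Int)
            (res.1.foldl (fun sb (c : Int × Int) => pvSet2 sb c.1 c.2 score) st.1,
              res.2.1, res.2.2)) st) st) := by
  intro xs
  induction xs with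
  | nil => intro _ sbA st h; exact h
  | cons x xs ih =>
      intro hxs sbA st h
      simp only [List.foldl_cons]
      refine ih (fun z hz => hxs z (List.mem_cons_of_mem _ hz)) _ _ ?_
      exact pvRel_foldInner board n m x (hxs x List.mem_cons_self)
        (PySem.List.pyRange 0 m 1) (fun y hy => by
          rw [PySem.List.mem_pyRange_one] at hy; exact hy) _ _ h

-- ---------- A equals pvFlood, and pvFlood's pointwise characterisation ----------
def pvBStep (board : List (List Int)) (n m : Int) :
    (List (List Int) × List (Int × Int) × List (Int × Int)) → Int → Int →
    (List (List Int) × List (Int × Int) × List (Int × Int)) :=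
  fun st sx sy =>
    if (sx, sy) ∈ st.2.1 then st
    else
      let v := pvAt board sx sy
      let res := pvDfs board n m v [(sx, sy)] (PySem.Set.add st.2.1 (sx, sy)) []
        (st.2.2.erase (sx, sy))
      let score := v * (res.1.length : Int)
      (res.1.foldl (fun sb (c : Int × Int) => pvSet2 sb c.1 c.2 score) st.1,
        res.2.1, res.2.2)

theorem pvRel_init (board : List (List Int)) :
    pvRel board (board.length : Int) ((PySem.List.pyGetD board 0 []).length : Int)
      (List.replicate ((board.length : Int)).toNat
        (List.replicate (((PySem.List.pyGetD board 0 []).length : Int)).toNat 0))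
      (List.replicate ((board.length : Int)).toNat
        (List.replicate (((PySem.List.pyGetD board 0 []).length : Int)).toNat 0),
       (PySem.Set.empty : List (Int × Int)),
       pvGridCells (board.length : Int) ((PySem.List.pyGetD board 0 []).length : Int)) := by
  refine ⟨rfl, pvShape_init _ _, by simp [PySem.Set.empty], ?_, ?_,
    pv_nodup_gridCells _ _, ?_, ?_, ?_, ?_⟩
  · intro c hc; simp [PySem.Set.empty] at hc
  · intro c hc; simp [PySem.Set.empty] at hc
  · intro c hgc; rw [pv_mem_gridCells]; simp [PySem.Set.empty, hgc]
  · intro c hc; exact (pv_mem_gridCells _ _ c).1 hc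
  · intro c hc; simp [PySem.Set.empty] at hc
  · intro c hgc _; exact pvAt_init _ _ c.1 c.2

-- the done set of pvFlood's state only grows, and each processed cell lands in it
theorem pvStepB_fold_done_mono (board : List (List Int)) (n m v : Int)
    (cs : List (Int × Int)) :
    ∀ s : List (Int × Int) × List (Int × Int) × List (Int × Int),
      ∀ c ∈ s.2.1, c ∈ (cs.foldl (pvStepB board n m v) s).2.1 := by
  induction cs with
  | nil => intro s c hc; exact hc
  | cons d cs ih =>
      intro s c hc
      refine ih _ c ?_
      simp only [pvStepB]
      split_ifs with h1
      · exact (PySem.Set.mem_add _ _ _).2 (Or.inl hc)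
      · exact hc

theorem pvDfs_done_mono (board : List (List Int)) (n m v : Int) :
    ∀ stack don comp r, ∀ c ∈ don,
      c ∈ (pvDfs board n m v stack don comp r).2.1 := by
  intro stack don comp r
  induction stack, don, comp, r using pvDfs.induct board n m v with
  | case1 don comp r =>
      intro c hc
      rw [pvDfs]; simpa using hc
  | case2 stack don comp r h xy st comp' sres ih =>
      intro c hc
      rw [pvDfs]
      simp only [dif_neg h]
      simp only [xy, st, comp', sres] at ih ⊢
      exact ih c (pvStepB_fold_done_mono board n m v _ _ c hc)

theorem pvBStep_done (board : List (List Int)) (n m : Int)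
    (st : List (List Int) × List (Int × Int) × List (Int × Int)) (sx sy : Int) :
    (∀ c ∈ st.2.1, c ∈ (pvBStep board n m st sx sy).2.1) ∧
      (sx, sy) ∈ (pvBStep board n m st sx sy).2.1 := by
  unfold pvBStep
  split_ifs with h1
  · exact ⟨fun c hc => hc, h1⟩
  · refine ⟨?_, ?_⟩
    · intro c hc
      exact pvDfs_done_mono board n m _ _ _ _ _ c
        ((PySem.Set.mem_add _ _ _).2 (Or.inl hc))
    · exact pvDfs_done_mono board n m _ _ _ _ _ _
        ((PySem.Set.mem_add _ _ _).2 (Or.inr rfl))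

theorem pvBFold_inner_done (board : List (List Int)) (n m sx : Int) :
    ∀ (ys : List Int) (st : List (List Int) × List (Int × Int) × List (Int × Int)),
      (∀ c ∈ st.2.1, c ∈ (ys.foldl (fun st sy => pvBStep board n m st sx sy) st).2.1) ∧
      (∀ y ∈ ys, (sx, y) ∈ (ys.foldl (fun st sy => pvBStep board n m st sx sy) st).2.1) := by
  intro ys
  induction ys with
  | nil => intro st; exact ⟨fun c hc => hc, by simp⟩
  | cons y ys ih =>
      intro st
      simp only [List.foldl_cons]
      refine ⟨fun c hc => (ih _).1 c ((pvBStep_done board n m st sx y).1 c hc), ?_⟩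
      intro z hz
      rcases List.mem_cons.1 hz with rfl | hz
      · exact (ih _).1 _ (pvBStep_done board n m st sx z).2
      · exact (ih _).2 z hz

theorem pvBFold_outer_mono (board : List (List Int)) (n m : Int) :
    ∀ (l : List Int) (st : List (List Int) × List (Int × Int) × List (Int × Int)),
      ∀ c ∈ st.2.1, c ∈ (l.foldl (fun st sx =>
        (PySem.List.pyRange 0 m 1).foldl (fun st sy => pvBStep board n m st sx sy) st)
        st).2.1 := by
  intro l
  induction l with
  | nil => intro st c hc; exact hc
  | cons a l ih =>
      intro st c hc
      simp only [List.foldl_cons]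
      exact ih _ c ((pvBFold_inner_done board n m a (PySem.List.pyRange 0 m 1) st).1 c hc)

theorem pvBFold_outer_done (board : List (List Int)) (n m : Int) :
    ∀ (xs : List Int) (st : List (List Int) × List (Int × Int) × List (Int × Int)),
      ∀ x ∈ xs, ∀ y ∈ PySem.List.pyRange 0 m 1,
        (x, y) ∈ (xs.foldl (fun st sx =>
          (PySem.List.pyRange 0 m 1).foldl (fun st sy => pvBStep board n m st sx sy) st)
          st).2.1 := by
  intro xs
  induction xs with
  | nil => intro st x hx; simp at hx
  | cons x xs ih =>
      intro st z hz y hy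
      simp only [List.foldl_cons]
      rcases List.mem_cons.1 hz with rfl | hz
      · exact pvBFold_outer_mono board n m xs _ _
          ((pvBFold_inner_done board n m z (PySem.List.pyRange 0 m 1) st).2 y hy)
      · exact ih _ z hz y hy

theorem pvA_eq_flood (board : List (List Int)) :
    get_score_board_bfs board = pvFlood board := by
  unfold get_score_board_bfs pvFlood
  have h := pvRel_foldOuter board (board.length : Int)
    ((PySem.List.pyGetD board 0 []).length : Int)
    (PySem.List.pyRange 0 (board.length : Int) 1)
    (fun x hx => (PySem.List.mem_pyRange_one).1 hx)
    _ _ (pvRel_init board)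
  exact h.1

-- the final pvFlood state: every grid cell is scored value × component size
theorem pvFlood_char (board : List (List Int)) :
    pvShape (pvFlood board) board.length (PySem.List.pyGetD board 0 []).length ∧
    ∀ ci cj : Int,
      pvGrid (board.length : Int) ((PySem.List.pyGetD board 0 []).length : Int) (ci, cj) →
      ∃ L, pvCompList board (board.length : Int)
          ((PySem.List.pyGetD board 0 []).length : Int) (ci, cj) L ∧
        pvAt (pvFlood board) ci cj = pvAt board ci cj * L.length := by
  have h := pvRel_foldOuter board (board.length : Int)
    ((PySem.List.pyGetD board 0 []).length : Int)
    (PySem.List.pyRange 0 (board.length : Int) 1)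
    (fun x hx => (PySem.List.mem_pyRange_one).1 hx)
    _ _ (pvRel_init board)
  have hfold : pvFlood board = ((PySem.List.pyRange 0 (board.length : Int) 1).foldl
      (fun st sx => (PySem.List.pyRange 0 ((PySem.List.pyGetD board 0 []).length : Int) 1).foldl
        (fun st sy => pvBStep board (board.length : Int)
          ((PySem.List.pyGetD board 0 []).length : Int) st sx sy) st)
      (List.replicate ((board.length : Int)).toNat
        (List.replicate (((PySem.List.pyGetD board 0 []).length : Int)).toNat 0),
       (PySem.Set.empty : List (Int × Int)),
       pvGridCells (board.length : Int) ((PySem.List.pyGetD board 0 []).length : Int))).1 := by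
    rfl
  constructor
  · have h21 := h.2.1
    rw [hfold]
    simpa using h21
  · intro ci cj hgc
    have hdone : (ci, cj) ∈ ((PySem.List.pyRange 0 (board.length : Int) 1).foldl
        (fun st sx => (PySem.List.pyRange 0 ((PySem.List.pyGetD board 0 []).length : Int) 1).foldl
          (fun st sy => pvBStep board (board.length : Int)
            ((PySem.List.pyGetD board 0 []).length : Int) st sx sy) st)
        (List.replicate ((board.length : Int)).toNat
          (List.replicate (((PySem.List.pyGetD board 0 []).length : Int)).toNat 0),
         (PySem.Set.empty : List (Int × Int)),
         pvGridCells (board.length : Int) ((PySem.List.pyGetD board 0 []).length : Int))).2.1 := by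
      exact pvBFold_outer_done board _ _ _ _ ci
        ((PySem.List.mem_pyRange_one).2 ⟨hgc.1, hgc.2.1⟩) cj
        ((PySem.List.mem_pyRange_one).2 ⟨hgc.2.2.1, hgc.2.2.2⟩)
    have hsc := h.2.2.2.2.2.2.2.2.1 (ci, cj) hdone
    obtain ⟨L, hL1, hL2⟩ := hsc
    exact ⟨L, hL1, by rw [hfold]; exact hL2⟩

-- ---------- union-find: find/union correctness ----------
def pvMono (p : List Nat) : Prop := ∀ i, p.getD i i ≤ i

def pvRoot (p : List Nat) (i : Nat) : Prop := p.getD i i = i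

theorem pvFindF_succ (p : List Nat) (f i : Nat) :
    pvFindF p (f + 1) i = if p.getD i i = i then i else pvFindF p f (p.getD i i) := rfl

theorem pvFindF_fuel (p : List Nat) (hm : pvMono p) :
    ∀ i f g, i < f → i < g → pvFindF p f i = pvFindF p g i := by
  intro i
  induction i using Nat.strong_induction_on with
  | _ i ih =>
      intro f g hf hg
      obtain ⟨f', rfl⟩ : ∃ f', f = f' + 1 := ⟨f - 1, by omega⟩
      obtain ⟨g', rfl⟩ : ∃ g', g = g' + 1 := ⟨g - 1, by omega⟩
      rw [pvFindF_succ, pvFindF_succ]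
      by_cases hr : p.getD i i = i
      · rw [if_pos hr, if_pos hr]
      · rw [if_neg hr, if_neg hr]
        have hlt : p.getD i i < i := lt_of_le_of_ne (hm i) hr
        exact ih _ hlt f' g' (by omega) (by omega)

theorem pvFindF_root (p : List Nat) (hm : pvMono p) :
    ∀ i f, i < f → pvRoot p (pvFindF p f i) ∧ pvFindF p f i ≤ i := by
  intro i
  induction i using Nat.strong_induction_on with
  | _ i ih =>
      intro f hf
      obtain ⟨f', rfl⟩ : ∃ f', f = f' + 1 := ⟨f - 1, by omega⟩
      rw [pvFindF_succ]
      by_cases hr : p.getD i i = i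
      · rw [if_pos hr]; exact ⟨hr, le_rfl⟩
      · rw [if_neg hr]
        have hlt : p.getD i i < i := lt_of_le_of_ne (hm i) hr
        obtain ⟨h1, h2⟩ := ih _ hlt f' (by omega)
        exact ⟨h1, by omega⟩

theorem pvFind_root (p : List Nat) (hm : pvMono p) (i : Nat) (hi : i < p.length) :
    pvRoot p (pvFind p i) ∧ pvFind p i ≤ i :=
  pvFindF_root p hm i p.length hi

theorem pvFindF_of_root (p : List Nat) (r f : Nat) (hr : pvRoot p r) :
    pvFindF p f r = r := by
  cases f with
  | zero => rfl
  | succ f =>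
      have hr' : p.getD r r = r := hr
      rw [pvFindF_succ, if_pos hr']

theorem pvFind_of_root (p : List Nat) (r : Nat) (hr : pvRoot p r) : pvFind p r = r :=
  pvFindF_of_root p r p.length hr

-- getD after set, at the self-default form used by find
theorem pvGetD_set (p : List Nat) (r v j : Nat) :
    (p.set r v).getD j j = if j = r ∧ r < p.length then v else p.getD j j := by
  rw [List.getD_eq_getElem?_getD, List.getD_eq_getElem?_getD, List.getElem?_set]
  split_ifs with h1 h2 h2 <;> simp_all <;> omega

theorem pvMono_set (p : List Nat) (hm : pvMono p) (r v : Nat) (hv : v ≤ r) :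
    pvMono (p.set r v) := by
  intro j
  rw [pvGetD_set]
  split_ifs with h
  · omega
  · exact hm j

theorem pvFind_step (p : List Nat) (hm : pvMono p) (i : Nat) (hi : i < p.length)
    (hr : ¬ pvRoot p i) : pvFind p i = pvFind p (p.getD i i) := by
  have hlt : p.getD i i < i := lt_of_le_of_ne (hm i) hr
  have hr2 : ¬ p.getD i i = i := hr
  unfold pvFind
  obtain ⟨f', hf⟩ : ∃ f', p.length = f' + 1 := ⟨p.length - 1, by omega⟩
  conv_lhs => rw [hf, pvFindF_succ, if_neg hr2]
  exact pvFindF_fuel p hm _ f' p.length (by omega) (by omega)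

theorem pvFind_set (p : List Nat) (hm : pvMono p) (r r' : Nat)
    (hr : pvRoot p r) (hr' : pvRoot p r') (hlt : r' < r) (hrN : r < p.length) :
    ∀ i, i < p.length →
      pvFind (p.set r r') i = if pvFind p i = r then r' else pvFind p i := by
  have hm' : pvMono (p.set r r') := pvMono_set p hm r r' (by omega)
  have hlen : (p.set r r').length = p.length := by simp
  have hroot' : pvRoot (p.set r r') r' := by
    unfold pvRoot
    rw [pvGetD_set, if_neg (by omega)]
    exact hr'
  intro i
  induction i using Nat.strong_induction_on with
  | _ i ih =>
      intro hi
      by_cases hri : pvRoot p i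
      · by_cases hir : i = r
        · subst hir
          have hstep : (p.set i r').getD i i = r' := by
            rw [pvGetD_set, if_pos ⟨rfl, hrN⟩]
          have hnr : ¬ pvRoot (p.set i r') i := by
            unfold pvRoot; rw [hstep]; omega
          rw [pvFind_step _ hm' i (by rw [hlen]; exact hi) hnr, hstep,
            pvFind_of_root _ _ hroot', pvFind_of_root _ _ hr, if_pos rfl]
        · have hri' : pvRoot (p.set r r') i := by
            unfold pvRoot; rw [pvGetD_set, if_neg (by tauto)]; exact hri
          rw [pvFind_of_root _ _ hri', pvFind_of_root _ _ hri, if_neg hir]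
      · have hir : i ≠ r := fun hh => hri (hh ▸ hr)
        have hj : p.getD i i < i := lt_of_le_of_ne (hm i) hri
        have hstep : (p.set r r').getD i i = p.getD i i := by
          rw [pvGetD_set, if_neg (by tauto)]
        have hnr' : ¬ pvRoot (p.set r r') i := by
          unfold pvRoot; rw [hstep]; exact hri
        rw [pvFind_step _ hm' i (by rw [hlen]; exact hi) hnr', hstep,
          pvFind_step p hm i hi hri, ih _ hj (by omega)]

theorem pvUnion_eq (p : List Nat) (a b : Nat) :
    pvUnion p a b =
      if pvFind p a = pvFind p b then p
      else if pvFind p a < pvFind p b then p.set (pvFind p b) (pvFind p a)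
      else p.set (pvFind p a) (pvFind p b) := rfl

theorem pvUnion_length (p : List Nat) (a b : Nat) :
    (pvUnion p a b).length = p.length := by
  rw [pvUnion_eq]
  split_ifs <;> simp

theorem pvUnion_mono (p : List Nat) (hm : pvMono p) (a b : Nat)
    (ha : a < p.length) (hb : b < p.length) : pvMono (pvUnion p a b) := by
  rw [pvUnion_eq]
  split_ifs with h1 h2
  · exact hm
  · exact pvMono_set p hm _ _ (by omega)
  · exact pvMono_set p hm _ _ (by omega)

theorem pvUnion_find (p : List Nat) (hm : pvMono p) (a b : Nat)
    (ha : a < p.length) (hb : b < p.length) :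
    ∀ i, i < p.length →
      pvFind (pvUnion p a b) i =
        if pvFind p i = pvFind p a ∨ pvFind p i = pvFind p b then
          min (pvFind p a) (pvFind p b) else pvFind p i := by
  intro i hi
  have hra := pvFind_root p hm a ha
  have hrb := pvFind_root p hm b hb
  rw [pvUnion_eq]
  by_cases h1 : pvFind p a = pvFind p b
  · rw [if_pos h1]
    by_cases h3 : pvFind p i = pvFind p a ∨ pvFind p i = pvFind p b
    · rw [if_pos h3]; rcases h3 with h3 | h3 <;> omega
    · rw [if_neg h3]
  · rw [if_neg h1]
    by_cases h2 : pvFind p a < pvFind p b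
    · rw [if_pos h2,
        pvFind_set p hm (pvFind p b) (pvFind p a) hrb.1 hra.1 h2 (by omega) i hi]
      by_cases h3 : pvFind p i = pvFind p b
      · rw [if_pos h3, if_pos (Or.inr h3)]; omega
      · rw [if_neg h3]
        by_cases h4 : pvFind p i = pvFind p a
        · rw [if_pos (Or.inl h4)]; omega
        · rw [if_neg (by push Not; exact ⟨h4, h3⟩)]
    · rw [if_neg h2]
      have h2' : pvFind p b < pvFind p a := by omega
      rw [pvFind_set p hm (pvFind p a) (pvFind p b) hra.1 hrb.1 h2' (by omega) i hi]
      by_cases h3 : pvFind p i = pvFind p a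
      · rw [if_pos h3, if_pos (Or.inl h3)]; omega
      · rw [if_neg h3]
        by_cases h4 : pvFind p i = pvFind p b
        · rw [if_pos (Or.inr h4)]; omega
        · rw [if_neg (by push Not; exact ⟨h3, h4⟩)]


-- ---------- the DSU invariant: find-classes = equivalence closure of processed edges ----------
def pvEqv (es : List (Nat × Nat)) : Nat → Nat → Prop :=
  Relation.EqvGen (fun i j => (i, j) ∈ es)

def pvInvD (N : Nat) (es : List (Nat × Nat)) (p : List Nat) : Prop :=
  p.length = N ∧ pvMono p ∧
  ∀ i j, i < N → j < N → (pvFind p i = pvFind p j ↔ pvEqv es i j)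

theorem pvEqv_nil (i j : Nat) : pvEqv [] i j ↔ i = j := by
  constructor
  · intro h
    induction h with
    | rel _ _ h => simp at h
    | refl => rfl
    | symm _ _ _ ih => omega
    | trans _ _ _ _ _ ih1 ih2 => omega
  · rintro rfl; exact Relation.EqvGen.refl i

theorem pvEqv_append_single (es : List (Nat × Nat)) (a b i j : Nat) :
    pvEqv (es ++ [(a, b)]) i j ↔
      pvEqv es i j ∨ (pvEqv es i a ∧ pvEqv es b j) ∨ (pvEqv es i b ∧ pvEqv es a j) := by
  constructor
  · intro h
    induction h with
    | rel x y hxy =>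
        rcases List.mem_append.1 hxy with h' | h'
        · exact Or.inl (Relation.EqvGen.rel _ _ h')
        · simp at h'
          obtain ⟨rfl, rfl⟩ := h'
          exact Or.inr (Or.inl ⟨Relation.EqvGen.refl _, Relation.EqvGen.refl _⟩)
    | refl x => exact Or.inl (Relation.EqvGen.refl x)
    | symm x y _ ih =>
        rcases ih with h' | ⟨h1, h2⟩ | ⟨h1, h2⟩
        · exact Or.inl (Relation.EqvGen.symm _ _ h')
        · exact Or.inr (Or.inr ⟨Relation.EqvGen.symm _ _ h2, Relation.EqvGen.symm _ _ h1⟩)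
        · exact Or.inr (Or.inl ⟨Relation.EqvGen.symm _ _ h2, Relation.EqvGen.symm _ _ h1⟩)
    | trans x y z _ _ ih1 ih2 =>
        rcases ih1 with h1 | ⟨h1, h1'⟩ | ⟨h1, h1'⟩ <;>
          rcases ih2 with h2 | ⟨h2, h2'⟩ | ⟨h2, h2'⟩
        · exact Or.inl (Relation.EqvGen.trans _ _ _ h1 h2)
        · exact Or.inr (Or.inl ⟨Relation.EqvGen.trans _ _ _ h1 h2, h2'⟩)
        · exact Or.inr (Or.inr ⟨Relation.EqvGen.trans _ _ _ h1 h2, h2'⟩)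
        · exact Or.inr (Or.inl ⟨h1, Relation.EqvGen.trans _ _ _ h1' h2⟩)
        · exact Or.inl (Relation.EqvGen.trans _ _ _ h1 (Relation.EqvGen.trans _ _ _
            (Relation.EqvGen.symm _ _ h2) (Relation.EqvGen.trans _ _ _
              (Relation.EqvGen.symm _ _ h1') h2')))
        · exact Or.inl (Relation.EqvGen.trans _ _ _ h1 h2')
        · exact Or.inr (Or.inr ⟨h1, Relation.EqvGen.trans _ _ _ h1' h2⟩)
        · exact Or.inl (Relation.EqvGen.trans _ _ _ h1 h2')
        · exact Or.inl (Relation.EqvGen.trans _ _ _ h1 (Relation.EqvGen.trans _ _ _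
            (Relation.EqvGen.symm _ _ h2) (Relation.EqvGen.trans _ _ _
              (Relation.EqvGen.symm _ _ h1') h2')))
  · intro h
    have hmono : ∀ x y, pvEqv es x y → pvEqv (es ++ [(a, b)]) x y := by
      intro x y hxy
      induction hxy with
      | rel u v h' => exact Relation.EqvGen.rel _ _ (List.mem_append_left _ h')
      | refl u => exact Relation.EqvGen.refl u
      | symm u v _ ih => exact Relation.EqvGen.symm _ _ ih
      | trans u v w _ _ ih1 ih2 => exact Relation.EqvGen.trans _ _ _ ih1 ih2
    have hab : pvEqv (es ++ [(a, b)]) a b :=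
      Relation.EqvGen.rel _ _ (List.mem_append_right _ (by simp))
    rcases h with h | ⟨h1, h2⟩ | ⟨h1, h2⟩
    · exact hmono _ _ h
    · exact Relation.EqvGen.trans _ _ _ (hmono _ _ h1)
        (Relation.EqvGen.trans _ _ _ hab (hmono _ _ h2))
    · exact Relation.EqvGen.trans _ _ _ (hmono _ _ h1)
        (Relation.EqvGen.trans _ _ _ (Relation.EqvGen.symm _ _ hab) (hmono _ _ h2))

theorem pvInvD_init (N : Nat) : pvInvD N [] (List.range N) := by
  have hroot : ∀ i, pvRoot (List.range N) i := by
    intro i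
    unfold pvRoot
    rw [List.getD_eq_getElem?_getD]
    rcases Nat.lt_or_ge i N with h | h
    · simp [List.getElem?_range h]
    · rw [List.getElem?_eq_none (by simpa using h)]; rfl
  refine ⟨by simp, fun i => le_of_eq (hroot i), ?_⟩
  intro i j _ _
  rw [pvFind_of_root _ _ (hroot i), pvFind_of_root _ _ (hroot j), pvEqv_nil]

theorem pvInvD_union (N : Nat) (es : List (Nat × Nat)) (p : List Nat)
    (h : pvInvD N es p) (a b : Nat) (ha : a < N) (hb : b < N) :
    pvInvD N (es ++ [(a, b)]) (pvUnion p a b) := by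
  obtain ⟨hlen, hm, hcls⟩ := h
  have ha' : a < p.length := by omega
  have hb' : b < p.length := by omega
  refine ⟨by rw [pvUnion_length, hlen], pvUnion_mono p hm a b ha' hb', ?_⟩
  intro i j hi hj
  have hi' : i < p.length := by omega
  have hj' : j < p.length := by omega
  rw [pvUnion_find p hm a b ha' hb' i hi', pvUnion_find p hm a b ha' hb' j hj',
    pvEqv_append_single,
    ← hcls i j hi hj, ← hcls i a hi ha, ← hcls b j hb hj, ← hcls i b hi hb,
    ← hcls a j ha hj]
  by_cases ci : pvFind p i = pvFind p a ∨ pvFind p i = pvFind p b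
  · by_cases cj : pvFind p j = pvFind p a ∨ pvFind p j = pvFind p b
    · rw [if_pos ci, if_pos cj]
      rcases ci with ci | ci <;> rcases cj with cj | cj <;>
        constructor <;> intro _ <;> omega
    · rw [if_pos ci, if_neg cj]
      push Not at cj
      rcases ci with ci | ci <;> constructor <;> intro hh <;>
        first
          | omega
          | (rcases hh with hh | ⟨hh1, hh2⟩ | ⟨hh1, hh2⟩ <;> omega)
  · by_cases cj : pvFind p j = pvFind p a ∨ pvFind p j = pvFind p b
    · rw [if_neg ci, if_pos cj]
      push Not at ci
      rcases cj with cj | cj <;> constructor <;> intro hh <;>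
        first
          | omega
          | (rcases hh with hh | ⟨hh1, hh2⟩ | ⟨hh1, hh2⟩ <;> omega)
    · rw [if_neg ci, if_neg cj]
      push Not at ci cj
      constructor
      · intro hh; exact Or.inl hh
      · intro hh
        rcases hh with hh | ⟨hh1, hh2⟩ | ⟨hh1, hh2⟩ <;> omega


theorem pvInvD_foldUnion (N : Nat) :
    ∀ (todo done : List (Nat × Nat)) (p : List Nat), pvInvD N done p →
      (∀ e ∈ todo, e.1 < N ∧ e.2 < N) →
      pvInvD N (done ++ todo)
        (todo.foldl (fun p e => pvUnion p e.1 e.2) p) := by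
  intro todo
  induction todo with
  | nil => intro done p h _; simpa using h
  | cons e todo ih =>
      intro done p h hb
      have h1 := pvInvD_union N done p h e.1 e.2 (hb e List.mem_cons_self).1
        (hb e List.mem_cons_self).2
      have h2 := ih (done ++ [(e.1, e.2)]) _ h1
        (fun e' he' => hb e' (List.mem_cons_of_mem _ he'))
      simpa using h2

-- ---------- the edge list processed by B's double loop ----------
def pvEdgesCell (board : List (List Int)) (n m : Int) (x y : Int) : List (Nat × Nat) :=
  (if x + 1 < n ∧ pvAt board (x + 1) y = pvAt board x y then
    [(pvCellIdx m x y, pvCellIdx m (x + 1) y)] else []) ++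
  (if y + 1 < m ∧ pvAt board x (y + 1) = pvAt board x y then
    [(pvCellIdx m x y, pvCellIdx m x (y + 1))] else [])

def pvEdges (board : List (List Int)) (n m : Int) : List (Nat × Nat) :=
  (PySem.List.pyRange 0 n 1).flatMap (fun x =>
    (PySem.List.pyRange 0 m 1).flatMap (fun y => pvEdgesCell board n m x y))

theorem pvFoldl_flatMap {α β γ : Type} (l : List α) (g : α → List β)
    (f : γ → β → γ) (init : γ) :
    (l.flatMap g).foldl f init = l.foldl (fun acc x => (g x).foldl f acc) init := by
  induction l generalizing init with
  | nil => rfl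
  | cons a l ih => simp [List.foldl_append, ih]

theorem pvFoldl_congr' {α β : Type} (l : List α) (f g : β → α → β) (init : β)
    (h : ∀ b x, x ∈ l → f b x = g b x) : l.foldl f init = l.foldl g init := by
  induction l generalizing init with
  | nil => rfl
  | cons a l ih =>
      simp only [List.foldl_cons]
      rw [h init a List.mem_cons_self]
      exact ih _ (fun b x hx => h b x (List.mem_cons_of_mem _ hx))

theorem pvParent_eq_foldEdges (board : List (List Int)) (n m : Int) :
    pvParent board n m =
      (pvEdges board n m).foldl (fun p e => pvUnion p e.1 e.2)
        (List.range (n.toNat * m.toNat)) := by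
  unfold pvParent pvEdges
  rw [pvFoldl_flatMap]
  refine pvFoldl_congr' _ _ _ _ ?_
  intro p x _
  rw [pvFoldl_flatMap]
  refine pvFoldl_congr' _ _ _ _ ?_
  intro q y _
  by_cases hc1 : x + 1 < n ∧ pvAt board (x + 1) y = pvAt board x y <;>
    by_cases hc2 : y + 1 < m ∧ pvAt board x (y + 1) = pvAt board x y <;>
      simp [pvEdgesCell, hc1, hc2, List.foldl_append]

theorem pvEdges_mem (board : List (List Int)) (n m : Int) (i j : Nat) :
    (i, j) ∈ pvEdges board n m ↔ ∃ x y,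
      (0 ≤ x ∧ x < n ∧ 0 ≤ y ∧ y < m) ∧
      ((x + 1 < n ∧ pvAt board (x + 1) y = pvAt board x y ∧
          i = pvCellIdx m x y ∧ j = pvCellIdx m (x + 1) y) ∨
       (y + 1 < m ∧ pvAt board x (y + 1) = pvAt board x y ∧
          i = pvCellIdx m x y ∧ j = pvCellIdx m x (y + 1))) := by
  unfold pvEdges pvEdgesCell
  simp only [List.mem_flatMap, List.mem_append, PySem.List.mem_pyRange_one]
  constructor
  · rintro ⟨x, hx, y, hy, hmem | hmem⟩ <;> rw [List.mem_ite_nil_right] at hmem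
    · obtain ⟨hc, he⟩ := hmem
      simp only [List.mem_singleton, Prod.mk.injEq] at he
      exact ⟨x, y, ⟨hx.1, hx.2, hy.1, hy.2⟩, Or.inl ⟨hc.1, hc.2, he.1, he.2⟩⟩
    · obtain ⟨hc, he⟩ := hmem
      simp only [List.mem_singleton, Prod.mk.injEq] at he
      exact ⟨x, y, ⟨hx.1, hx.2, hy.1, hy.2⟩, Or.inr ⟨hc.1, hc.2, he.1, he.2⟩⟩
  · rintro ⟨x, y, hg, hcase | hcase⟩
    · refine ⟨x, ⟨hg.1, hg.2.1⟩, y, ⟨hg.2.2.1, hg.2.2.2⟩, Or.inl ?_⟩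
      rw [List.mem_ite_nil_right]
      exact ⟨⟨hcase.1, hcase.2.1⟩, by simp [hcase.2.2.1, hcase.2.2.2]⟩
    · refine ⟨x, ⟨hg.1, hg.2.1⟩, y, ⟨hg.2.2.1, hg.2.2.2⟩, Or.inr ?_⟩
      rw [List.mem_ite_nil_right]
      exact ⟨⟨hcase.1, hcase.2.1⟩, by simp [hcase.2.2.1, hcase.2.2.2]⟩

-- ---------- row-major encoding of grid cells ----------
theorem pvCellIdx_eq (m x y : Int) (hx : 0 ≤ x) (hy : 0 ≤ y) (hm : 0 ≤ m) :
    pvCellIdx m x y = x.toNat * m.toNat + y.toNat := by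
  unfold pvCellIdx
  have h1 : x * m + y = ((x.toNat * m.toNat + y.toNat : Nat) : Int) := by
    push_cast [Int.toNat_of_nonneg hx, Int.toNat_of_nonneg hy, Int.toNat_of_nonneg hm]
    ring
  rw [h1, Int.toNat_natCast]

theorem pvCellIdx_lt (n m x y : Int) (h : pvGrid n m (x, y)) :
    pvCellIdx m x y < n.toNat * m.toNat := by
  replace h : 0 ≤ x ∧ x < n ∧ 0 ≤ y ∧ y < m := h
  obtain ⟨hx, hxn, hy, hym⟩ := h
  rw [pvCellIdx_eq m x y hx hy (by omega)]
  have h1 : x.toNat < n.toNat := by omega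
  have h2 : y.toNat < m.toNat := by omega
  calc x.toNat * m.toNat + y.toNat < (x.toNat + 1) * m.toNat := by
        rw [Nat.add_mul, Nat.one_mul]; omega
    _ ≤ n.toNat * m.toNat := Nat.mul_le_mul_right _ (by omega)

def pvDec (m : Int) (i : Nat) : Int × Int :=
  (((i / m.toNat : Nat) : Int), ((i % m.toNat : Nat) : Int))

theorem pvDec_grid (n m : Int) (i : Nat) (h : i < n.toNat * m.toNat) :
    pvGrid n m (pvDec m i) ∧ pvCellIdx m (pvDec m i).1 (pvDec m i).2 = i := by
  have hm0 : 0 < m.toNat := by by_contra h'; simp [Nat.eq_zero_of_not_pos h'] at h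
  have hn0 : 0 < n.toNat := by by_contra h'; simp [Nat.eq_zero_of_not_pos h'] at h
  have hq : i / m.toNat < n.toNat := Nat.div_lt_of_lt_mul (Nat.mul_comm n.toNat m.toNat ▸ h)
  have hr : i % m.toNat < m.toNat := Nat.mod_lt _ hm0
  have hgrid : pvGrid n m (pvDec m i) := by
    unfold pvDec pvGrid
    refine ⟨by positivity, by omega, by positivity, by omega⟩
  refine ⟨hgrid, ?_⟩
  unfold pvDec
  rw [pvCellIdx_eq _ _ _ (by positivity) (by positivity) (by omega)]
  simp only [Int.toNat_natCast]
  rw [Nat.mul_comm]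
  exact Nat.div_add_mod i m.toNat

theorem pvDec_enc (n m : Int) (x y : Int) (h : pvGrid n m (x, y)) :
    pvDec m (pvCellIdx m x y) = (x, y) := by
  replace h : 0 ≤ x ∧ x < n ∧ 0 ≤ y ∧ y < m := h
  obtain ⟨hx, hxn, hy, hym⟩ := h
  have hm0 : 0 < m.toNat := by omega
  have h2 : y.toNat < m.toNat := by omega
  rw [pvCellIdx_eq m x y hx hy (by omega)]
  unfold pvDec
  have hdiv : (x.toNat * m.toNat + y.toNat) / m.toNat = x.toNat := by
    rw [Nat.mul_comm, Nat.mul_add_div hm0, Nat.div_eq_of_lt h2, Nat.add_zero]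
  have hmod : (x.toNat * m.toNat + y.toNat) % m.toNat = y.toNat := by
    rw [Nat.mul_comm, Nat.mul_add_mod, Nat.mod_eq_of_lt h2]
  rw [hdiv, hmod]
  simp [Prod.ext_iff, Int.toNat_of_nonneg hx, Int.toNat_of_nonneg hy]

theorem pvEdges_bound (board : List (List Int)) (n m : Int) :
    ∀ e ∈ pvEdges board n m, e.1 < n.toNat * m.toNat ∧ e.2 < n.toNat * m.toNat := by
  rintro ⟨i, j⟩ hmem
  rw [pvEdges_mem] at hmem
  obtain ⟨x, y, hg, hcase | hcase⟩ := hmem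
  · obtain ⟨hxn, _, rfl, rfl⟩ := hcase
    exact ⟨pvCellIdx_lt n m x y ⟨hg.1, hg.2.1, hg.2.2.1, hg.2.2.2⟩,
      pvCellIdx_lt n m (x + 1) y ⟨by omega, hxn, hg.2.2.1, hg.2.2.2⟩⟩
  · obtain ⟨hym, _, rfl, rfl⟩ := hcase
    exact ⟨pvCellIdx_lt n m x y ⟨hg.1, hg.2.1, hg.2.2.1, hg.2.2.2⟩,
      pvCellIdx_lt n m x (y + 1) ⟨hg.1, hg.2.1, by omega, hym⟩⟩

-- ---------- DSU classes are exactly the reachability components ----------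
theorem pvEqv_to_reach (board : List (List Int)) (n m : Int) :
    ∀ i j, pvEqv (pvEdges board n m) i j →
      i = j ∨ (i < n.toNat * m.toNat ∧ j < n.toNat * m.toNat ∧
        pvReach board n m (pvDec m i) (pvDec m j)) := by
  intro i j h
  induction h with
  | rel u v huv =>
      rw [pvEdges_mem] at huv
      obtain ⟨x, y, hg, hcase | hcase⟩ := huv
      · obtain ⟨hxn, hval, rfl, rfl⟩ := hcase
        have hgx : pvGrid n m (x, y) := ⟨hg.1, hg.2.1, hg.2.2.1, hg.2.2.2⟩
        have hgx' : pvGrid n m (x + 1, y) := ⟨by omega, hxn, hg.2.2.1, hg.2.2.2⟩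
        refine Or.inr ⟨pvCellIdx_lt n m x y hgx, pvCellIdx_lt n m (x + 1) y hgx', ?_⟩
        rw [pvDec_enc n m x y hgx, pvDec_enc n m (x + 1) y hgx']
        exact Relation.ReflTransGen.single ⟨hgx', by simp [pvDIRECTIONS], hval⟩
      · obtain ⟨hym, hval, rfl, rfl⟩ := hcase
        have hgx : pvGrid n m (x, y) := ⟨hg.1, hg.2.1, hg.2.2.1, hg.2.2.2⟩
        have hgx' : pvGrid n m (x, y + 1) := ⟨hg.1, hg.2.1, by omega, hym⟩
        refine Or.inr ⟨pvCellIdx_lt n m x y hgx, pvCellIdx_lt n m x (y + 1) hgx', ?_⟩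
        rw [pvDec_enc n m x y hgx, pvDec_enc n m x (y + 1) hgx']
        exact Relation.ReflTransGen.single ⟨hgx', by simp [pvDIRECTIONS], hval⟩
  | refl u => exact Or.inl rfl
  | symm u v _ ih =>
      rcases ih with rfl | ⟨h1, h2, h3⟩
      · exact Or.inl rfl
      · exact Or.inr ⟨h2, h1, pvReach_symm board n m (pvDec_grid n m u h1).1 h3⟩
  | trans u v w _ _ ih1 ih2 =>
      rcases ih1 with rfl | ⟨h1, h2, h3⟩
      · exact ih2
      · rcases ih2 with rfl | ⟨h4, h5, h6⟩
        · exact Or.inr ⟨h1, h2, h3⟩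
        · exact Or.inr ⟨h1, h5, Relation.ReflTransGen.trans h3 h6⟩

theorem pvReach_to_eqv (board : List (List Int)) (n m : Int) (c d : Int × Int)
    (hc : pvGrid n m c) (h : pvReach board n m c d) :
    pvEqv (pvEdges board n m) (pvCellIdx m c.1 c.2) (pvCellIdx m d.1 d.2) := by
  induction h with
  | refl => exact Relation.EqvGen.refl _
  | @tail b e hr hadj ih =>
      obtain ⟨b1, b2⟩ := b
      obtain ⟨e1, e2⟩ := e
      have hgb : pvGrid n m (b1, b2) := pvReach_grid board n m hc hr
      have hge : pvGrid n m (e1, e2) := hadj.1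
      replace hgb : 0 ≤ b1 ∧ b1 < n ∧ 0 ≤ b2 ∧ b2 < m := hgb
      replace hge : 0 ≤ e1 ∧ e1 < n ∧ 0 ≤ e2 ∧ e2 < m := hge
      have hval : pvAt board e1 e2 = pvAt board b1 b2 := hadj.2.2
      have hdir := hadj.2.1
      simp only [pvDIRECTIONS, List.mem_cons, List.mem_singleton, Prod.mk.injEq,
        List.not_mem_nil, or_false] at hdir
      refine Relation.EqvGen.trans _ _ _ ih ?_
      rcases hdir with ⟨h1, h2⟩ | ⟨h1, h2⟩ | ⟨h1, h2⟩ | ⟨h1, h2⟩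
      · -- e = (b1, b2 + 1) : right edge from b
        have h3 : e1 = b1 := by omega
        have h4 : e2 = b2 + 1 := by omega
        rw [h3, h4] at hval
        refine Relation.EqvGen.rel _ _ ?_
        rw [pvEdges_mem]
        exact ⟨b1, b2, ⟨hgb.1, hgb.2.1, hgb.2.2.1, hgb.2.2.2⟩,
          Or.inr ⟨by omega, hval, rfl, by rw [h3, h4]⟩⟩
      · -- e = (b1 + 1, b2) : down edge from b
        have h3 : e1 = b1 + 1 := by omega
        have h4 : e2 = b2 := by omega
        rw [h3, h4] at hval
        refine Relation.EqvGen.rel _ _ ?_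
        rw [pvEdges_mem]
        exact ⟨b1, b2, ⟨hgb.1, hgb.2.1, hgb.2.2.1, hgb.2.2.2⟩,
          Or.inl ⟨by omega, hval, rfl, by rw [h3, h4]⟩⟩
      · -- e = (b1, b2 - 1) : b is the right neighbour of e
        have h3 : b1 = e1 := by omega
        have h4 : b2 = e2 + 1 := by omega
        rw [h3, h4] at hval
        refine Relation.EqvGen.symm _ _ (Relation.EqvGen.rel _ _ ?_)
        rw [pvEdges_mem]
        exact ⟨e1, e2, ⟨hge.1, hge.2.1, hge.2.2.1, hge.2.2.2⟩,
          Or.inr ⟨by omega, hval.symm, rfl, by rw [h3, h4]⟩⟩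
      · -- e = (b1 - 1, b2) : b is the down neighbour of e
        have h3 : b1 = e1 + 1 := by omega
        have h4 : b2 = e2 := by omega
        rw [h3, h4] at hval
        refine Relation.EqvGen.symm _ _ (Relation.EqvGen.rel _ _ ?_)
        rw [pvEdges_mem]
        exact ⟨e1, e2, ⟨hge.1, hge.2.1, hge.2.2.1, hge.2.2.2⟩,
          Or.inl ⟨by omega, hval.symm, rfl, by rw [h3, h4]⟩⟩


-- ---------- the size pass counts class members ----------
theorem pvGetD0_set (s : List Nat) (k v r : Nat) (hk : k < s.length) :
    (s.set k v).getD r 0 = if r = k then v else s.getD r 0 := by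
  rw [List.getD_eq_getElem?_getD, List.getD_eq_getElem?_getD, List.getElem?_set]
  by_cases h : r = k
  · subst h
    rw [if_pos rfl, if_pos hk, if_pos rfl]
    rfl
  · rw [if_neg (fun hh => h hh.symm), if_neg h]

theorem pvFold_count (p : List Nat) (r : Nat) :
    ∀ (l : List Nat) (s : List Nat), (∀ i ∈ l, pvFind p i < s.length) →
      (l.foldl (fun s i => s.set (pvFind p i) (s.getD (pvFind p i) 0 + 1)) s).getD r 0 =
        s.getD r 0 + l.countP (fun i => pvFind p i = r) := by
  intro l
  induction l with
  | nil => intro s _; simp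
  | cons a l ih =>
      intro s hb
      simp only [List.foldl_cons, List.countP_cons]
      rw [ih _ (fun i hi => by
        rw [List.length_set]; exact hb i (List.mem_cons_of_mem _ hi))]
      rw [pvGetD0_set s _ _ r (hb a List.mem_cons_self)]
      by_cases hra : r = pvFind p a
      · rw [if_pos hra]
        simp only [hra, decide_true, if_true]
        omega
      · rw [if_neg hra]
        have hne : ¬ (pvFind p a = r) := fun h => hra h.symm
        simp [hne]

theorem pvSizes_count (p : List Nat) (N : Nat) (hm : pvMono p) (hlen : p.length = N)
    (r : Nat) :
    (pvSizes p N).getD r 0 = (List.range N).countP (fun i => pvFind p i = r) := by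
  unfold pvSizes
  rw [pvFold_count p r (List.range N) (List.replicate N 0) (fun i hi => by
    rw [List.length_replicate]
    have hiN : i < N := List.mem_range.1 hi
    have := (pvFind_root p hm i (by omega)).2
    omega)]
  simp

-- ---------- B's output entry equals value × component size ----------
theorem pvCount_eq_compLength (board : List (List Int)) (n m : Int) (p : List Nat)
    (hInv : pvInvD (n.toNat * m.toNat) (pvEdges board n m) p)
    (ci cj : Int) (hgc : pvGrid n m (ci, cj)) (L : List (Int × Int))
    (hL : pvCompList board n m (ci, cj) L) :
    (List.range (n.toNat * m.toNat)).countP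
      (fun i => pvFind p i = pvFind p (pvCellIdx m ci cj)) = L.length := by
  have hcN : pvCellIdx m ci cj < n.toNat * m.toNat := pvCellIdx_lt n m ci cj hgc
  have hdecenc : pvDec m (pvCellIdx m ci cj) = (ci, cj) := pvDec_enc n m ci cj hgc
  have hstep : (List.range (n.toNat * m.toNat)).countP
      (fun i => pvFind p i = pvFind p (pvCellIdx m ci cj)) =
      (List.range (n.toNat * m.toNat)).countP (fun i => pvDec m i ∈ L) := by
    refine List.countP_congr ?_
    intro i hi
    have hiN : i < n.toNat * m.toNat := List.mem_range.1 hi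
    simp only [decide_eq_true_eq]
    rw [hInv.2.2 i _ hiN hcN]
    constructor
    · intro h
      rcases pvEqv_to_reach board n m i _ h with h' | ⟨_, _, h'⟩
      · rw [h', hdecenc]
        exact (hL.2 (ci, cj)).2 Relation.ReflTransGen.refl
      · rw [hdecenc] at h'
        exact (hL.2 _).2 (pvReach_symm board n m (pvDec_grid n m i hiN).1 h')
    · intro h
      have hreach : pvReach board n m (ci, cj) (pvDec m i) := (hL.2 _).1 h
      have hEq := pvReach_to_eqv board n m (ci, cj) (pvDec m i) hgc hreach
      rw [(pvDec_grid n m i hiN).2] at hEq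
      exact Relation.EqvGen.symm _ _ hEq
  rw [hstep]
  have hmapdec : ((List.range (n.toNat * m.toNat)).map (pvDec m)).Perm (pvGridCells n m) := by
    rw [List.perm_ext_iff_of_nodup ?_ (pv_nodup_gridCells n m)]
    · intro d
      rw [pv_mem_gridCells]
      simp only [List.mem_map, List.mem_range]
      constructor
      · rintro ⟨i, hiN, rfl⟩
        exact (pvDec_grid n m i hiN).1
      · intro hgd
        obtain ⟨d1, d2⟩ := d
        exact ⟨pvCellIdx m d1 d2, pvCellIdx_lt n m d1 d2 hgd, pvDec_enc n m d1 d2 hgd⟩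
    · refine List.Nodup.map_on ?_ (List.nodup_range)
      intro i hi j hj hij
      rw [List.mem_range] at hi hj
      have h1 := (pvDec_grid n m i hi).2
      have h2 := (pvDec_grid n m j hj).2
      rw [← h1, ← h2, hij]
  have hLsub : ∀ d ∈ L, d ∈ pvGridCells n m := by
    intro d hd
    rw [pv_mem_gridCells]
    exact pvReach_grid board n m hgc ((hL.2 d).1 hd)
  calc (List.range (n.toNat * m.toNat)).countP (fun i => pvDec m i ∈ L)
      = ((List.range (n.toNat * m.toNat)).map (pvDec m)).countP (fun d => d ∈ L) := by
        rw [List.countP_map]; rfl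
    _ = (pvGridCells n m).countP (fun d => d ∈ L) := hmapdec.countP_eq _
    _ = ((pvGridCells n m).filter (fun d => d ∈ L)).length := by
        rw [List.countP_eq_length_filter]
    _ = L.length := by
        refine List.Perm.length_eq ?_
        rw [List.perm_ext_iff_of_nodup (List.Nodup.filter _ (pv_nodup_gridCells n m)) hL.1]
        intro d
        rw [List.mem_filter]
        simp only [decide_eq_true_eq]
        exact ⟨fun h => h.2, fun h => ⟨hLsub d h, h⟩⟩

-- B's matrix entry, read off the comprehension
theorem pvAlt_entry (board : List (List Int)) (iN jN : Nat)
    (hi : iN < board.length) (hj : jN < (PySem.List.pyGetD board 0 []).length) :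
    pvAt (get_score_board_bfs_alt board) iN jN =
      pvAt board iN jN *
        ((pvSizes
            (pvParent board (board.length : Int)
              ((PySem.List.pyGetD board 0 []).length : Int))
            (((board.length : Int)).toNat *
              (((PySem.List.pyGetD board 0 []).length : Int)).toNat)).getD
          (pvFind
            (pvParent board (board.length : Int)
              ((PySem.List.pyGetD board 0 []).length : Int))
            (pvCellIdx ((PySem.List.pyGetD board 0 []).length : Int) iN jN)) 0 : Int) := by
  conv_lhs => rw [pvAt]
  simp only [get_score_board_bfs_alt]
  rw [PySem.List.pyGetD_map_pyRange _ board.length iN [] hi,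
    PySem.List.pyGetD_map_pyRange _ (PySem.List.pyGetD board 0 []).length jN 0 hj]

-- ---------- port B equals pvFlood ----------
theorem pvAlt_eq_flood (board : List (List Int)) :
    get_score_board_bfs_alt board = pvFlood board := by
  have hchar := pvFlood_char board
  have hInv : pvInvD
      (((board.length : Int)).toNat * (((PySem.List.pyGetD board 0 []).length : Int)).toNat)
      (pvEdges board (board.length : Int) ((PySem.List.pyGetD board 0 []).length : Int))
      (pvParent board (board.length : Int) ((PySem.List.pyGetD board 0 []).length : Int)) := by
    rw [pvParent_eq_foldEdges]
    have h := pvInvD_foldUnion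
      (((board.length : Int)).toNat * (((PySem.List.pyGetD board 0 []).length : Int)).toNat)
      (pvEdges board (board.length : Int) ((PySem.List.pyGetD board 0 []).length : Int)) []
      (List.range (((board.length : Int)).toNat *
        (((PySem.List.pyGetD board 0 []).length : Int)).toNat))
      (pvInvD_init _) (pvEdges_bound board _ _)
    simpa using h
  have hshapeAlt : pvShape (get_score_board_bfs_alt board) board.length
      (PySem.List.pyGetD board 0 []).length := by
    constructor
    · unfold get_score_board_bfs_alt
      simp [PySem.List.length_pyRange_one]
    · intro row hrow
      unfold get_score_board_bfs_alt at hrow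
      simp only [List.mem_map] at hrow
      obtain ⟨x, _, rfl⟩ := hrow
      simp [PySem.List.length_pyRange_one]
  refine pvMat_ext _ _ board.length (PySem.List.pyGetD board 0 []).length hshapeAlt hchar.1 ?_
  intro iN jN hi hj
  have hgc : pvGrid (board.length : Int) ((PySem.List.pyGetD board 0 []).length : Int)
      ((iN : Int), (jN : Int)) := ⟨by positivity, by omega, by positivity, by omega⟩
  obtain ⟨L, hL, hFv⟩ := hchar.2 (iN : Int) (jN : Int) hgc
  have hsz : (pvSizes
      (pvParent board (board.length : Int) ((PySem.List.pyGetD board 0 []).length : Int))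
      (((board.length : Int)).toNat *
        (((PySem.List.pyGetD board 0 []).length : Int)).toNat)).getD
      (pvFind
        (pvParent board (board.length : Int) ((PySem.List.pyGetD board 0 []).length : Int))
        (pvCellIdx ((PySem.List.pyGetD board 0 []).length : Int) iN jN)) 0 = L.length := by
    rw [pvSizes_count _ _ hInv.2.1 hInv.1]
    exact pvCount_eq_compLength board (board.length : Int)
      ((PySem.List.pyGetD board 0 []).length : Int) _ hInv (iN : Int) (jN : Int) hgc L hL
  rw [pvAlt_entry board iN jN hi hj, hsz, hFv]

-- ===== VERDICT-SUPPORT =====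
theorem pvPorts_agree (board : List (List Int)) :
    get_score_board_bfs board = get_score_board_bfs_alt board := by
  rw [pvA_eq_flood, pvAlt_eq_flood]

theorem get_score_board_bfs_spec : Claim_equal_get_score_board_bfs := by
  intro board _ _
  unfold Spec_get_score_board_bfs
  exact pvPorts_agree board
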